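-- pv_equiv track=rewrite | github.com/lsmman/All-about-Algorithms | python-SWExpert/5653_줄기세포배양.py | solution
-- ===== SOURCE A (Python) =====
-- from collections import deque
--
-- def spread(cur_info, whole_map, new_cells, limit_x, limit_y):
--     x, y, life = cur_info
--     inactive, empty = 1, 0
--     for add_x, add_y in [(-1, 0), (1, 0), (0, -1), (0, 1)]:
--         new_x, new_y = x + add_x, y + add_y
--         if (
--             new_x >= 0
--             and new_x < limit_x
--             and new_y >= 0
--             and new_y < limit_y
--             and (
--                 whole_map[new_x][new_y][0] == empty
--                 or ((new_x, new_y) in new_cells and whole_map[new_x][new_y][2] < life)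
--             )
--         ):
--             whole_map[new_x][new_y] = [inactive, life, life]
--             new_cells.append((new_x, new_y))
--     return
--
-- def solution(N, M, K, matrix):
--     answer = t = 0
--     queue = deque()
--     inactive, active, dead, empty = (1, 2, -1, 0)  # 비활성, 활성, 죽음, 원래부터 없음
--     status, remain, _life = (0, 1, 2)
--     spread_leng = 150
--     limit_x, limit_y = N + spread_leng * 2, M + spread_leng * 2
--     whole_map = [[[empty, 0, 0] for _ in range(limit_y)] for __ in range(limit_x)]
--     # [status, remain, life] : 현재 상태, 상태의 남은 생명력, 생명력 수치
--
--     for i in range(N):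
--         for j in range(M):
--             if matrix[i][j]:  # 생명력이 있으면
--                 whole_map[spread_leng + i][spread_leng + j] = [inactive, matrix[i][j], matrix[i][j]]
--                 queue.append((spread_leng + i, spread_leng + j))
--     while queue and t < K:
--         new_cells = []
--         for _ in range(len(queue)):
--             cur_x, cur_y = queue.popleft()
--             cur_status, cur_remain, cur_life = whole_map[cur_x][cur_y]
--             if cur_status == inactive:
--                 if cur_remain == 1:
--                     whole_map[cur_x][cur_y][status] = active
--                     whole_map[cur_x][cur_y][remain] = cur_life
--                 else:
--                     whole_map[cur_x][cur_y][remain] -= 1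
--             elif cur_status == active:
--                 spread((cur_x, cur_y, cur_life), whole_map, new_cells, limit_x, limit_y)
--                 if cur_remain == 1:
--                     whole_map[cur_x][cur_y][status] = dead
--                 else:
--                     whole_map[cur_x][cur_y][remain] -= 1
--             if cur_status >= 1:
--                 queue.append((cur_x, cur_y))
--         queue.extend(new_cells)
--         t += 1
--
--     for i in range(limit_x):
--         for j in range(limit_y):
--             if whole_map[i][j][status] >= 1:
--                 answer += 1
--     return answer
-- ===== SOURCE B (Python) =====
-- def solution(N, M, K, matrix):
--     # Cells as a dict coord -> (life, birth tick), in the same padded frame as the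
--     # original grid.  A cell born at tick b with life L is latent through tick b+L,
--     # spreads during ticks b+L+1 .. b+2L (its active phase) and dies afterwards;
--     # `horizon` is the last tick at which any current cell is still alive.
--     limit_x, limit_y = N + 300, M + 300
--     cells = {}
--     horizon = 0
--     for i in range(N):
--         for j in range(M):
--             v = matrix[i][j]
--             if v:
--                 cells[(150 + i, 150 + j)] = (v, 0)
--                 horizon = max(horizon, 2 * v)
--     t = 1
--     while t <= K and t <= horizon:
--         claims = {}
--         for (x, y), (L, b) in cells.items():
--             if b + L < t <= b + 2 * L:
--                 for nb in ((x - 1, y), (x + 1, y), (x, y - 1), (x, y + 1)):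
--                     if 0 <= nb[0] < limit_x and 0 <= nb[1] < limit_y and nb not in cells:
--                         if claims.get(nb, 0) < L:
--                             claims[nb] = L
--         for c, L in claims.items():
--             cells[c] = (L, t)
--             horizon = max(horizon, t + 2 * L)
--         t += 1
--     return sum(1 for (L, b) in cells.values() if K < b + 2 * L)
-- ===== Notes on version B (the rewrite author's own statement) =====
-- stated objective: faster
-- what changed: Replaces the padded (N+300)x(M+300) grid, the deque state machine with per-cell inactive/active remain countdowns and re-enqueueing, and the final full-grid scan by a dict coord->(life, birth tick) with active-window arithmetic and a horizon bound; Pre_ additionally excludes matrices with a negative entry in the read NxM block, whose immortal never-activating cells are an accident of A's countdown representation outside the puzzle's positive-life domain.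
-- outside the precondition, e.g. on solution(1, 1, 2, [[-3]]): A returns 1, B returns 0
import Mathlib
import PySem

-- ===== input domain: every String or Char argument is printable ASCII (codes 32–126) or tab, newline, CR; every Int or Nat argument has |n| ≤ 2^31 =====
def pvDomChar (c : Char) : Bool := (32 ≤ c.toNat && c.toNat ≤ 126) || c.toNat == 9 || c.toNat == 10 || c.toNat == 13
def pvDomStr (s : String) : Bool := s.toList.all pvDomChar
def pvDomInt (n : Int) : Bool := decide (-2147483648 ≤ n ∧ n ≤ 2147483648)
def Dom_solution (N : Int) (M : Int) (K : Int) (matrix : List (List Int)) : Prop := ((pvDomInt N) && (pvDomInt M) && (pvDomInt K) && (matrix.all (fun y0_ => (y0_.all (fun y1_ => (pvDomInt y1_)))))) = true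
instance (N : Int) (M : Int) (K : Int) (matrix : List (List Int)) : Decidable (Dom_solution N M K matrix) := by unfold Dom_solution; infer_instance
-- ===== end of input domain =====

-- B replaces A's padded grid + deque countdown state machine with a dict coord -> (life, birth)
-- plus active-window arithmetic and a horizon bound; equal return value proved on Pre_.


-- ===== PORT A =====
-- whole_map is a list of rows of triples [status, remain, life]; indices used by A are
-- always nonnegative and in range, so .toNat indexing is exact.
def pvGet2 (wm : List (List (List Int))) (x y : Int) : List Int :=
  (wm.getD x.toNat []).getD y.toNat []

def pvSet2 (wm : List (List (List Int))) (x y : Int) (v : List Int) : List (List (List Int)) :=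
  wm.set x.toNat ((wm.getD x.toNat []).set y.toNat v)

-- whole_map[x][y][i] = val
def pvSetElem (wm : List (List (List Int))) (x y : Int) (i : Nat) (val : Int) : List (List (List Int)) :=
  pvSet2 wm x y ((pvGet2 wm x y).set i val)

-- the helper 'spread'
def pvSpread (x y life : Int) (wm : List (List (List Int))) (newCells : List (Int × Int))
    (limitX limitY : Int) : List (List (List Int)) × List (Int × Int) :=
  [((-1 : Int), (0 : Int)), (1, 0), (0, -1), (0, 1)].foldl
    (fun st d =>
      let newX := x + d.1
      let newY := y + d.2
      if 0 ≤ newX ∧ newX < limitX ∧ 0 ≤ newY ∧ newY < limitY ∧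
          ((pvGet2 st.1 newX newY).getD 0 0 = 0 ∨
            ((newX, newY) ∈ st.2 ∧ (pvGet2 st.1 newX newY).getD 2 0 < life)) then
        (pvSet2 st.1 newX newY [1, life, life], st.2 ++ [(newX, newY)])
      else st)
    (wm, newCells)

-- the body of 'for _ in range(len(queue))' (n = snapshot of len(queue); queue popped at
-- the front, appended at the back)
def pvTickA (limitX limitY : Int) :
    Nat → List (Int × Int) → List (List (List Int)) → List (Int × Int) →
    List (Int × Int) × List (List (List Int)) × List (Int × Int)
  | 0, q, wm, nc => (q, wm, nc)
  | _ + 1, [], wm, nc => ([], wm, nc)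
  | n + 1, p :: rest, wm, nc =>
    let tr := pvGet2 wm p.1 p.2
    let curStatus := tr.getD 0 0
    let curRemain := tr.getD 1 0
    let curLife := tr.getD 2 0
    let st1 : List (List (List Int)) × List (Int × Int) :=
      if curStatus = 1 then
        (if curRemain = 1 then
          pvSetElem (pvSetElem wm p.1 p.2 0 2) p.1 p.2 1 curLife
        else
          pvSetElem wm p.1 p.2 1 (curRemain - 1), nc)
      else if curStatus = 2 then
        let sp := pvSpread p.1 p.2 curLife wm nc limitX limitY
        (if curRemain = 1 then pvSetElem sp.1 p.1 p.2 0 (-1)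
         else pvSetElem sp.1 p.1 p.2 1 (curRemain - 1), sp.2)
      else (wm, nc)
    let q' := if 1 ≤ curStatus then rest ++ [p] else rest
    pvTickA limitX limitY n q' st1.1 st1.2

-- 'while queue and t < K': t only drives the bound, so the loop is fuel = K.toNat steps
def pvLoopA (limitX limitY : Int) :
    Nat → List (Int × Int) → List (List (List Int)) → List (List (List Int))
  | 0, _, wm => wm
  | fuel + 1, queue, wm =>
    if queue = [] then wm
    else
      let r := pvTickA limitX limitY queue.length queue wm []
      pvLoopA limitX limitY fuel (r.1 ++ r.2.2) r.2.1

def solution (N : Int) (M : Int) (K : Int) (matrix : List (List Int)) : Int :=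
  let spreadLeng : Int := 150
  let limitX := N + spreadLeng * 2
  let limitY := M + spreadLeng * 2
  let wm0 : List (List (List Int)) :=
    (PySem.List.pyRange 0 limitX 1).map (fun _ =>
      (PySem.List.pyRange 0 limitY 1).map (fun _ => ([0, 0, 0] : List Int)))
  let seeded :=
    (PySem.List.pyRange 0 N 1).foldl
      (fun st i =>
        (PySem.List.pyRange 0 M 1).foldl
          (fun (st : List (List (List Int)) × List (Int × Int)) j =>
            let v := PySem.List.pyGetD (PySem.List.pyGetD matrix i []) j 0
            if v ≠ 0 then
              (pvSet2 st.1 (spreadLeng + i) (spreadLeng + j) [1, v, v],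
                st.2 ++ [(spreadLeng + i, spreadLeng + j)])
            else st)
          st)
      (wm0, ([] : List (Int × Int)))
  let wmF := pvLoopA limitX limitY K.toNat seeded.2 seeded.1
  wmF.foldl (fun acc row => row.foldl (fun acc cell => if 1 ≤ cell.getD 0 0 then acc + 1 else acc) acc) 0

-- ===== PORT B =====
-- cells : coord -> (life, birth tick)
-- the per-tick claims dict: empty in-frame neighbours of cells whose active window
-- [b+L+1, b+2L] contains t, keyed by coord, value the maximal claiming life
def pvClaims (limitX limitY t : Int) (cells : PySem.Dict (Int × Int) (Int × Int)) :
    PySem.Dict (Int × Int) Int :=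
  cells.items.foldl
    (fun cl pv =>
      if pv.2.2 + pv.2.1 < t ∧ t ≤ pv.2.2 + 2 * pv.2.1 then
        [(pv.1.1 - 1, pv.1.2), (pv.1.1 + 1, pv.1.2), (pv.1.1, pv.1.2 - 1), (pv.1.1, pv.1.2 + 1)].foldl
          (fun cl p =>
            if 0 ≤ p.1 ∧ p.1 < limitX ∧ 0 ≤ p.2 ∧ p.2 < limitY ∧
                cells.contains p = false ∧ cl.getD p 0 < pv.2.1 then
              cl.insert p pv.2.1
            else cl)
          cl
      else cl)
    PySem.Dict.empty

-- commit the claimed cells with birth t and extend the horizon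
def pvCommit (t : Int) (cl : PySem.Dict (Int × Int) Int)
    (st : PySem.Dict (Int × Int) (Int × Int) × Int) :
    PySem.Dict (Int × Int) (Int × Int) × Int :=
  cl.items.foldl (fun st p => (st.1.insert p.1 (p.2, t), max st.2 (t + 2 * p.2))) st

-- 'while t <= K and t <= horizon' (the t <= K bound is the fuel)
def pvLoopB (limitX limitY : Int) :
    Nat → Int → Int → PySem.Dict (Int × Int) (Int × Int) → PySem.Dict (Int × Int) (Int × Int)
  | 0, _, _, cells => cells
  | fuel + 1, t, h, cells =>
    if h < t then cells
    else
      let st := pvCommit t (pvClaims limitX limitY t cells) (cells, h)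
      pvLoopB limitX limitY fuel (t + 1) st.2 st.1

def solution_alt (N : Int) (M : Int) (K : Int) (matrix : List (List Int)) : Int :=
  let limitX := N + 300
  let limitY := M + 300
  let seeded : PySem.Dict (Int × Int) (Int × Int) × Int :=
    (PySem.List.pyRange 0 N 1).foldl
      (fun st i =>
        (PySem.List.pyRange 0 M 1).foldl
          (fun (st : PySem.Dict (Int × Int) (Int × Int) × Int) j =>
            let v := PySem.List.pyGetD (PySem.List.pyGetD matrix i []) j 0
            if v ≠ 0 then (st.1.insert (150 + i, 150 + j) (v, 0), max st.2 (2 * v)) else st)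
          st)
      (PySem.Dict.empty, 0)
  let cellsF := pvLoopB limitX limitY K.toNat 1 seeded.2 seeded.1
  cellsF.values.foldl (fun acc v => acc + (if K < v.2 + 2 * v.1 then 1 else 0)) 0

-- ===== PRECONDITION & SPEC =====
-- Pre_ excludes the inputs where A's 'matrix[i][j]' (0 ≤ i < N, 0 ≤ j < M) raises an
-- IndexError, and matrices with a negative entry in that read block: a negative "life"
-- lies outside the puzzle's positive-life domain, and A's immortal never-activating
-- cell there is an accident of its countdown representation.
def Pre_solution (N : Int) (M : Int) (K : Int) (matrix : List (List Int)) : Prop :=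
  N ≤ 0 ∨ M ≤ 0 ∨
    (N ≤ matrix.length ∧ ∀ r ∈ matrix.take N.toNat, M ≤ r.length ∧ ∀ x ∈ r.take M.toNat, 0 ≤ x)
instance (N : Int) (M : Int) (K : Int) (matrix : List (List Int)) : Decidable (Pre_solution N M K matrix) := by unfold Pre_solution; infer_instance

def pvWitness_solution : Int × Int × Int × List (List Int) := (2, 2, 3, [[1, 0], [0, 2]])

def Spec_solution (N : Int) (M : Int) (K : Int) (matrix : List (List Int)) (out : Int) : Prop := out = solution_alt N M K matrix
instance (N : Int) (M : Int) (K : Int) (matrix : List (List Int)) (out : Int) : Decidable (Spec_solution N M K matrix out) := by unfold Spec_solution; infer_instance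

-- ===== CLAIM (what is proved, stated in full; the proofs are below) =====
def Claim_equal_solution : Prop := ∀ (N : Int) (M : Int) (K : Int) (matrix : List (List Int)), Dom_solution N M K matrix → Pre_solution N M K matrix → Spec_solution N M K matrix (solution N M K matrix)

-- ===== LEMMAS AND PROOFS =====


lemma pvRgetD {α : Type} (lx : Int) (g : Int → α) (x : Int) (hd : α) (h0 : 0 ≤ x) (h : x < lx) :
    ((PySem.List.pyRange 0 lx 1).map g).getD x.toNat hd = g x := by
  have hk : x.toNat < (lx - 0).toNat := by omega
  simp only [List.getD, PySem.List.pyRange_one, zero_add, List.map_map, List.length_map,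
    List.length_range, hk, getElem?_pos, List.getElem_map, List.getElem_range, Function.comp_apply,
    Option.getD_some]
  congr 1; omega

lemma pvRset {α : Type} (lx : Int) (g : Int → α) (x : Int) (v : α) (h0 : 0 ≤ x) (h : x < lx) :
    ((PySem.List.pyRange 0 lx 1).map g).set x.toNat v
      = (PySem.List.pyRange 0 lx 1).map (fun z => if z = x then v else g z) := by
  apply List.ext_getElem
  · simp
  intro k hk1 hk2
  simp only [PySem.List.pyRange_one, zero_add, List.map_map, List.length_set, List.length_map,
    List.length_range] at hk1 hk2 ⊢
  rw [List.getElem_set]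
  simp only [List.getElem_map, List.getElem_range, Function.comp_apply]
  split_ifs with h1 h2 h2 <;> first | rfl | (exfalso; omega)

-- coordinates and neighbourhood
def pvNbrs (p : Int × Int) : List (Int × Int) :=
  [(p.1 - 1, p.2), (p.1 + 1, p.2), (p.1, p.2 - 1), (p.1, p.2 + 1)]

def pvInB (lx ly : Int) (p : Int × Int) : Prop :=
  0 ≤ p.1 ∧ p.1 < lx ∧ 0 ≤ p.2 ∧ p.2 < ly

-- membership in A's queue after t completed ticks
def pvAliveB (t : Int) (v : Int × Int) : Bool := decide (v.1 ≤ 0 ∨ t - 1 < v.2 + 2 * v.1)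

-- the triple A stores for a cell of value v = (life, birth) after t ticks
def pvRender (t : Int) (v : Int × Int) : List Int :=
  if v.1 ≤ 0 ∨ t - v.2 < v.1 then [1, v.1 - (t - v.2), v.1]
  else if t - v.2 < 2 * v.1 then [2, 2 * v.1 - (t - v.2), v.1]
  else [-1, 1, v.1]

-- mid-tick hybrid picture of the map: claimed cells, processed cells advanced to t+1
def pvHyb (cells : PySem.Dict (Int × Int) (Int × Int)) (t : Int) (pre : List (Int × Int))
    (cl : PySem.Dict (Int × Int) Int) (p : Int × Int) : List Int :=
  match cl.get? p with
  | some m => [1, m, m]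
  | none =>
    match cells.get? p with
    | some v => pvRender (if p ∈ pre then t + 1 else t) v
    | none => [0, 0, 0]

def pvF (cells : PySem.Dict (Int × Int) (Int × Int)) (t : Int) (p : Int × Int) : List Int :=
  match cells.get? p with
  | some v => pvRender t v
  | none => [0, 0, 0]

def pvGrid (lx ly : Int) (f : Int × Int → List Int) : List (List (List Int)) :=
  (PySem.List.pyRange 0 lx 1).map (fun x => (PySem.List.pyRange 0 ly 1).map (fun y => f (x, y)))

def pvQueueOf (t : Int) (cells : PySem.Dict (Int × Int) (Int × Int)) : List (Int × Int) :=
  (cells.items.filter (fun pv => pvAliveB t pv.2)).map (fun pv => pv.1)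

def pvUpd (f : Int × Int → List Int) (p : Int × Int) (v : List Int) : Int × Int → List Int :=
  fun q => if q = p then v else f q

-- A's invariant after t ticks, phrased on B's cells dict
def pvInv (lx ly t : Int) (cells : PySem.Dict (Int × Int) (Int × Int)) : Prop :=
  0 ≤ t ∧ cells.keys.Nodup ∧
  (∀ pv ∈ cells.items, pvInB lx ly pv.1 ∧ 0 ≤ pv.2.2 ∧ pv.2.2 ≤ t ∧ 1 ≤ pv.2.1) ∧
  (cells.items.map (fun pv => pv.2.2)).Pairwise (· ≤ ·) ∧
  (∀ p, pvInB lx ly p → cells.get? p = none →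
    ∀ q ∈ pvNbrs p, ∀ v, cells.get? q = some v → 1 ≤ v.1 → t < v.2 + v.1 + 1)

-- ---- grid access lemmas ----
lemma pvGrid_get2 (lx ly : Int) (f : Int × Int → List Int) (p : Int × Int)
    (h : pvInB lx ly p) : pvGet2 (pvGrid lx ly f) p.1 p.2 = f p := by
  obtain ⟨h1, h2, h3, h4⟩ := h
  unfold pvGet2 pvGrid
  rw [pvRgetD lx _ p.1 [] h1 h2, pvRgetD ly _ p.2 [] h3 h4]

lemma pvGrid_set2 (lx ly : Int) (f : Int × Int → List Int) (p : Int × Int) (v : List Int)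
    (h : pvInB lx ly p) : pvSet2 (pvGrid lx ly f) p.1 p.2 v = pvGrid lx ly (pvUpd f p v) := by
  obtain ⟨h1, h2, h3, h4⟩ := h
  unfold pvSet2 pvGrid
  rw [pvRgetD lx _ p.1 [] h1 h2, pvRset ly _ p.2 v h3 h4, pvRset lx _ p.1 _ h1 h2]
  apply List.map_congr_left
  intro x hx
  rw [PySem.List.mem_pyRange_one] at hx
  by_cases hxp : x = p.1
  · subst hxp
    simp only [if_pos rfl]
    apply List.map_congr_left
    intro y hy
    unfold pvUpd
    by_cases hyp : y = p.2
    · subst hyp; simp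
    · simp [hyp, Prod.ext_iff]
  · simp only [if_neg hxp]
    apply List.map_congr_left
    intro y hy
    unfold pvUpd
    have : (x, y) ≠ p := by simp [Prod.ext_iff]; intro hc; exact absurd hc hxp
    simp [this]

lemma pvGrid_congr (lx ly : Int) (f g : Int × Int → List Int)
    (h : ∀ p, pvInB lx ly p → f p = g p) : pvGrid lx ly f = pvGrid lx ly g := by
  unfold pvGrid
  apply List.map_congr_left
  intro x hx
  rw [PySem.List.mem_pyRange_one] at hx
  apply List.map_congr_left
  intro y hy
  rw [PySem.List.mem_pyRange_one] at hy
  exact h (x, y) ⟨hx.1, hx.2, hy.1, hy.2⟩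

lemma pvGrid_setElem (lx ly : Int) (f : Int × Int → List Int) (p : Int × Int) (i : Nat) (x : Int)
    (h : pvInB lx ly p) :
    pvSetElem (pvGrid lx ly f) p.1 p.2 i x = pvGrid lx ly (pvUpd f p ((f p).set i x)) := by
  unfold pvSetElem
  rw [pvGrid_get2 lx ly f p h, pvGrid_set2 lx ly f p _ h]

-- life status after s completed ticks
def pvLive (s : Int) (v : Int × Int) : Bool := decide (v.1 ≤ 0 ∨ s - v.2 < 2 * v.1)

lemma pvRender_ge1_iff (t : Int) (v : Int × Int) :
    (1 ≤ (pvRender t v).getD 0 0) ↔ pvLive t v = true := by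
  unfold pvRender pvLive
  split_ifs with h1 h2 <;> simp <;> omega

def pvPos (lx ly : Int) : List (Int × Int) :=
  (PySem.List.pyRange 0 lx 1).flatMap (fun x => (PySem.List.pyRange 0 ly 1).map (fun y => (x, y)))

lemma pvPos_mem (lx ly : Int) (p : Int × Int) : p ∈ pvPos lx ly ↔ pvInB lx ly p := by
  unfold pvPos pvInB
  simp only [List.mem_flatMap, List.mem_map, PySem.List.mem_pyRange_one]
  constructor
  · rintro ⟨x, hx, y, hy, rfl⟩; exact ⟨hx.1, hx.2, hy.1, hy.2⟩
  · rintro ⟨h1, h2, h3, h4⟩; exact ⟨p.1, ⟨h1, h2⟩, p.2, ⟨h3, h4⟩, rfl⟩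

lemma pvPos_nodup (lx ly : Int) : (pvPos lx ly).Nodup := by
  unfold pvPos
  rw [List.nodup_flatMap]
  refine ⟨fun x _ => ?_, ?_⟩
  · exact (PySem.List.nodup_pyRange_one 0 ly).map (fun a b h => by simpa using congrArg Prod.snd h)
  · refine List.Pairwise.imp ?_ (PySem.List.nodup_pyRange_one 0 lx)
    intro a b hab
    simp only [Function.onFun, List.disjoint_left, List.mem_map]
    rintro p ⟨u, _, rfl⟩ ⟨w, _, hw⟩
    exact hab (by simpa using (congrArg Prod.fst hw).symm)

-- the final count A computes over a rendered grid
lemma pvCountA_grid (lx ly t : Int) (cells : PySem.Dict (Int × Int) (Int × Int))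
    (hnd : cells.keys.Nodup) (hB : ∀ pv ∈ cells.items, pvInB lx ly pv.1) :
    (pvGrid lx ly (pvF cells t)).foldl
        (fun acc row => row.foldl (fun acc cell => if 1 ≤ cell.getD 0 0 then acc + 1 else acc) acc) 0
      = ((cells.items.filter (fun pv => pvLive t pv.2)).length : Int) := by
  have hflat : (pvGrid lx ly (pvF cells t)).flatten = (pvPos lx ly).map (pvF cells t) := by
    unfold pvGrid pvPos
    rw [List.map_flatMap]
    rw [List.flatMap_def]
    congr 1
    apply List.map_congr_left
    intro x _
    rw [List.map_map]
    rfl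
  rw [← List.foldl_flatten, hflat]
  have hstep : (fun (acc : Int) (cell : List Int) => if 1 ≤ cell.getD 0 0 then acc + 1 else acc)
      = fun acc cell => if (decide (1 ≤ cell.getD 0 0)) = true then acc + 1 else acc := by
    funext acc cell; simp
  rw [hstep, PySem.List.foldl_count_if, List.countP_map, zero_add]
  have hcnt : List.countP ((fun cell => decide (1 ≤ cell.getD 0 0)) ∘ pvF cells t) (pvPos lx ly)
      = (cells.items.filter (fun pv => pvLive t pv.2)).length := by
    rw [List.countP_eq_length_filter]
    have hmemL : ∀ p, p ∈ (pvPos lx ly).filter ((fun cell => decide (1 ≤ cell.getD 0 0)) ∘ pvF cells t)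
        ↔ ∃ v, (p, v) ∈ cells.items ∧ pvLive t v = true := by
      intro p
      rw [List.mem_filter, pvPos_mem]
      simp only [Function.comp_apply, decide_eq_true_eq]
      constructor
      · rintro ⟨hin, hge⟩
        unfold pvF at hge
        rcases hg : cells.get? p with _ | v
        · rw [hg] at hge; simp at hge
        · rw [hg] at hge
          exact ⟨v, PySem.Dict.mem_items_of_get?_eq_some _ hg, (pvRender_ge1_iff t v).mp hge⟩
      · rintro ⟨v, hmem, hlive⟩
        have hget : cells.get? p = some v := PySem.Dict.get?_of_mem_items _ hmem hnd
        refine ⟨hB (p, v) hmem, ?_⟩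
        unfold pvF
        rw [hget, pvRender_ge1_iff]
        exact hlive
    have hmemR : ∀ p, p ∈ (cells.items.filter (fun pv => pvLive t pv.2)).map (fun pv => pv.1)
        ↔ ∃ v, (p, v) ∈ cells.items ∧ pvLive t v = true := by
      intro p
      simp only [List.mem_map, List.mem_filter]
      constructor
      · rintro ⟨⟨q, w⟩, ⟨hm, hl⟩, rfl⟩; exact ⟨w, hm, hl⟩
      · rintro ⟨v, hm, hl⟩; exact ⟨(p, v), ⟨hm, hl⟩, rfl⟩
    have h1 := (pvPos_nodup lx ly).filter ((fun cell => decide (1 ≤ cell.getD 0 0)) ∘ pvF cells t)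
    have h2 : ((cells.items.filter (fun pv => pvLive t pv.2)).map (fun pv => pv.1)).Nodup := by
      have hsub : List.Sublist ((cells.items.filter (fun pv => pvLive t pv.2)).map (fun pv => pv.1))
          (cells.items.map (fun pv => pv.1)) := List.Sublist.map _ List.filter_sublist
      exact List.Nodup.sublist hsub hnd
    have := (List.perm_of_nodup_nodup_toFinset_eq h1 h2
      (by ext x; simp only [List.mem_toFinset]; rw [hmemL, hmemR])).length_eq
    rw [this, List.length_map]
  rw [hcnt]

-- B's final count is the number of items with death tick beyond Kv
lemma pvCountB (Kv : Int) (cells : PySem.Dict (Int × Int) (Int × Int)) :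
    cells.values.foldl (fun acc v => acc + (if Kv < v.2 + 2 * v.1 then 1 else 0)) 0
      = ((cells.items.filter (fun pv => decide (Kv < pv.2.2 + 2 * pv.2.1))).length : Int) := by
  have : (fun (acc : Int) (v : Int × Int) => acc + (if Kv < v.2 + 2 * v.1 then 1 else 0))
      = fun acc v => acc + (if (decide (Kv < v.2 + 2 * v.1)) = true then 1 else 0) := by
    funext acc v; simp
  rw [this, PySem.List.foldl_add, PySem.List.sum_map_ite_one_zero]
  have hv : cells.values = cells.items.map (fun pv => pv.2) := rfl
  rw [hv, List.countP_map, List.countP_eq_length_filter]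
  norm_num
  congr 1


-- ---- the within-tick machinery ----

-- value of a queue coordinate
def pvVal (cells : PySem.Dict (Int × Int) (Int × Int)) (p : Int × Int) : Int × Int :=
  (cells.get? p).getD (0, 0)

-- B's claim step for one cell, at tick tau
def pvClStep (limitX limitY tau : Int) (cells : PySem.Dict (Int × Int) (Int × Int))
    (cl : PySem.Dict (Int × Int) Int) (pv : (Int × Int) × (Int × Int)) : PySem.Dict (Int × Int) Int :=
  if pv.2.2 + pv.2.1 < tau ∧ tau ≤ pv.2.2 + 2 * pv.2.1 then
    (pvNbrs pv.1).foldl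
      (fun cl p =>
        if 0 ≤ p.1 ∧ p.1 < limitX ∧ 0 ≤ p.2 ∧ p.2 < limitY ∧
            cells.contains p = false ∧ cl.getD p 0 < pv.2.1 then
          cl.insert p pv.2.1
        else cl)
      cl
  else cl

lemma pvClaims_eq_fold (limitX limitY tau : Int) (cells : PySem.Dict (Int × Int) (Int × Int)) :
    pvClaims limitX limitY tau cells
      = cells.items.foldl (pvClStep limitX limitY tau cells) PySem.Dict.empty := rfl

-- A's per-queue-element step, state (whole_map, pushes, new_cells)
def pvProcStep (limitX limitY : Int)
    (st : List (List (List Int)) × List (Int × Int) × List (Int × Int)) (p : Int × Int) :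
    List (List (List Int)) × List (Int × Int) × List (Int × Int) :=
  let wm := st.1
  let nc := st.2.2
  let tr := pvGet2 wm p.1 p.2
  let curStatus := tr.getD 0 0
  let curRemain := tr.getD 1 0
  let curLife := tr.getD 2 0
  let st1 : List (List (List Int)) × List (Int × Int) :=
    if curStatus = 1 then
      (if curRemain = 1 then
        pvSetElem (pvSetElem wm p.1 p.2 0 2) p.1 p.2 1 curLife
      else
        pvSetElem wm p.1 p.2 1 (curRemain - 1), nc)
    else if curStatus = 2 then
      let sp := pvSpread p.1 p.2 curLife wm nc limitX limitY
      (if curRemain = 1 then pvSetElem sp.1 p.1 p.2 0 (-1)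
       else pvSetElem sp.1 p.1 p.2 1 (curRemain - 1), sp.2)
    else (wm, nc)
  (st1.1, (if 1 ≤ curStatus then st.2.1 ++ [p] else st.2.1), st1.2)

lemma pvProcStep_pushes (limitX limitY : Int) (wm : List (List (List Int)))
    (pu nc : List (Int × Int)) (p : Int × Int) :
    pvProcStep limitX limitY (wm, pu, nc) p
      = ((pvProcStep limitX limitY (wm, [], nc) p).1,
          pu ++ (pvProcStep limitX limitY (wm, [], nc) p).2.1,
          (pvProcStep limitX limitY (wm, [], nc) p).2.2) := by
  simp only [pvProcStep]
  split_ifs <;> simp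

lemma pvProc_fold_pushes (limitX limitY : Int) :
    ∀ (ks : List (Int × Int)) (wm : List (List (List Int))) (pu nc : List (Int × Int)),
    ks.foldl (pvProcStep limitX limitY) (wm, pu, nc)
      = ((ks.foldl (pvProcStep limitX limitY) (wm, [], nc)).1,
          pu ++ (ks.foldl (pvProcStep limitX limitY) (wm, [], nc)).2.1,
          (ks.foldl (pvProcStep limitX limitY) (wm, [], nc)).2.2) := by
  intro ks
  induction ks with
  | nil => intro wm pu nc; simp
  | cons p ks ih =>
    intro wm pu nc
    simp only [List.foldl_cons]
    rw [pvProcStep_pushes, ih]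
    conv_rhs => rw [pvProcStep_pushes, ih]
    simp

-- the deque loop is the fold over the queue snapshot, pushes appended behind
lemma pvTickA_eq_fold (limitX limitY : Int) :
    ∀ (ks acc : List (Int × Int)) (wm : List (List (List Int))) (nc : List (Int × Int)),
    pvTickA limitX limitY ks.length (ks ++ acc) wm nc
      = (acc ++ (ks.foldl (pvProcStep limitX limitY) (wm, [], nc)).2.1,
          (ks.foldl (pvProcStep limitX limitY) (wm, [], nc)).1,
          (ks.foldl (pvProcStep limitX limitY) (wm, [], nc)).2.2) := by
  intro ks
  induction ks with
  | nil => intro acc wm nc; simp [pvTickA]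
  | cons p ks ih =>
    intro acc wm nc
    have hlen : (p :: ks).length = ks.length + 1 := rfl
    rw [hlen, show (p :: ks) ++ acc = p :: (ks ++ acc) from rfl]
    show (let tr := pvGet2 wm p.1 p.2
      let curStatus := tr.getD 0 0
      let curRemain := tr.getD 1 0
      let curLife := tr.getD 2 0
      let st1 : List (List (List Int)) × List (Int × Int) :=
        if curStatus = 1 then
          (if curRemain = 1 then
            pvSetElem (pvSetElem wm p.1 p.2 0 2) p.1 p.2 1 curLife
          else
            pvSetElem wm p.1 p.2 1 (curRemain - 1), nc)
        else if curStatus = 2 then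
          let sp := pvSpread p.1 p.2 curLife wm nc limitX limitY
          (if curRemain = 1 then pvSetElem sp.1 p.1 p.2 0 (-1)
           else pvSetElem sp.1 p.1 p.2 1 (curRemain - 1), sp.2)
        else (wm, nc)
      let q' := if 1 ≤ curStatus then (ks ++ acc) ++ [p] else ks ++ acc
      pvTickA limitX limitY ks.length q' st1.1 st1.2) = _
    simp only [List.foldl_cons]
    conv_rhs => rw [pvProcStep_pushes, pvProc_fold_pushes]
    by_cases h : 1 ≤ (pvGet2 wm p.1 p.2).getD 0 0
    · simp only [pvProcStep, h, if_true, if_pos h]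
      rw [show (ks ++ acc) ++ [p] = ks ++ (acc ++ [p]) from by simp, ih]
      simp [List.append_assoc]
    · simp only [pvProcStep, h, if_false, if_neg h]
      rw [ih]
      simp [List.append_assoc]

-- invariant carried for the claims dict while a tick is processed;
-- PP is the list of already-processed claimers
def pvCI (limitX limitY t : Int) (cells : PySem.Dict (Int × Int) (Int × Int))
    (PP : List (Int × Int)) (cl : PySem.Dict (Int × Int) Int) : Prop :=
  cl.keys.Nodup ∧
  ∀ e ∈ cl.items, cells.get? e.1 = none ∧ pvInB limitX limitY e.1 ∧
    ∃ c v, c ∈ PP ∧ cells.get? c = some v ∧ e.2 = v.1 ∧ 1 ≤ v.1 ∧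
      v.2 + v.1 + 1 = t + 1 ∧ e.1 ∈ pvNbrs c

lemma pvNbrs_symm (p q : Int × Int) (h : q ∈ pvNbrs p) : p ∈ pvNbrs q := by
  unfold pvNbrs at *
  simp only [List.mem_cons, List.mem_singleton, List.not_mem_nil, or_false] at *
  rcases h with h | h | h | h <;> rw [h] <;> simp [Prod.ext_iff] <;> omega

lemma pvCI_mono (limitX limitY t : Int) (cells : PySem.Dict (Int × Int) (Int × Int))
    (PP PP' : List (Int × Int)) (cl : PySem.Dict (Int × Int) Int)
    (hsub : ∀ x ∈ PP, x ∈ PP') (h : pvCI limitX limitY t cells PP cl) :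
    pvCI limitX limitY t cells PP' cl := by
  refine ⟨h.1, fun e he => ?_⟩
  obtain ⟨h1, h2, c, v, hc, hv, hrest⟩ := h.2 e he
  exact ⟨h1, h2, c, v, hsub c hc, hv, hrest⟩

lemma pvCI_none (limitX limitY t : Int) (cells : PySem.Dict (Int × Int) (Int × Int))
    (PP : List (Int × Int)) (cl : PySem.Dict (Int × Int) Int)
    (h : pvCI limitX limitY t cells PP cl) (q : Int × Int) (m : Int)
    (hq : cl.get? q = some m) : cells.get? q = none :=
  (h.2 (q, m) (PySem.Dict.mem_items_of_get?_eq_some _ hq)).1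

lemma pvHyb_claimed (cells : PySem.Dict (Int × Int) (Int × Int)) (t : Int)
    (pre : List (Int × Int)) (cl : PySem.Dict (Int × Int) Int) (q : Int × Int) (m : Int)
    (hq : cl.get? q = some m) : pvHyb cells t pre cl q = [1, m, m] := by
  unfold pvHyb; rw [hq]

lemma pvHyb_unclaimed (cells : PySem.Dict (Int × Int) (Int × Int)) (t : Int)
    (pre : List (Int × Int)) (cl : PySem.Dict (Int × Int) Int) (q : Int × Int)
    (hq : cl.get? q = none) :
    pvHyb cells t pre cl q
      = (match cells.get? q with
          | some v => pvRender (if q ∈ pre then t + 1 else t) v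
          | none => [0, 0, 0]) := by
  unfold pvHyb; rw [hq]

lemma pvHyb_some (cells : PySem.Dict (Int × Int) (Int × Int)) (t : Int)
    (pre : List (Int × Int)) (cl : PySem.Dict (Int × Int) Int) (q : Int × Int) (v : Int × Int)
    (hclq : cl.get? q = none) (hc : cells.get? q = some v) :
    pvHyb cells t pre cl q = pvRender (if q ∈ pre then t + 1 else t) v := by
  unfold pvHyb
  rw [hclq, hc]

lemma pvRender_status_ne0 (t : Int) (v : Int × Int) : (pvRender t v).getD 0 0 ≠ 0 := by
  unfold pvRender; split_ifs <;> simp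

-- pvSpread is the fold of its body over the four neighbours
lemma pvSpread_nbrs (x y life : Int) (wm : List (List (List Int))) (nc : List (Int × Int))
    (limitX limitY : Int) :
    pvSpread x y life wm nc limitX limitY
      = (pvNbrs (x, y)).foldl
          (fun st q =>
            if 0 ≤ q.1 ∧ q.1 < limitX ∧ 0 ≤ q.2 ∧ q.2 < limitY ∧
                ((pvGet2 st.1 q.1 q.2).getD 0 0 = 0 ∨
                  (q ∈ st.2 ∧ (pvGet2 st.1 q.1 q.2).getD 2 0 < life)) then
              (pvSet2 st.1 q.1 q.2 [1, life, life], st.2 ++ [q])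
            else st)
          (wm, nc) := by
  have h : pvNbrs (x, y)
      = [((-1 : Int), (0 : Int)), (1, 0), (0, -1), (0, 1)].map (fun d => (x + d.1, y + d.2)) := by
    simp [pvNbrs, Prod.ext_iff]
    norm_num
    constructor <;> ring
  rw [h, List.foldl_map]
  rfl

-- the inner claim fold of B for a single spreading cell of life L
def pvClInner (limitX limitY : Int) (cells : PySem.Dict (Int × Int) (Int × Int)) (L : Int)
    (nl : List (Int × Int)) (cl : PySem.Dict (Int × Int) Int) : PySem.Dict (Int × Int) Int :=
  nl.foldl
    (fun cl q =>
      if 0 ≤ q.1 ∧ q.1 < limitX ∧ 0 ≤ q.2 ∧ q.2 < limitY ∧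
          cells.contains q = false ∧ cl.getD q 0 < L then
        cl.insert q L
      else cl)
    cl

-- one active cell's spread, against B's claim fold
lemma pvSpread_inner (limitX limitY t : Int) (cells : PySem.Dict (Int × Int) (Int × Int))
    (pre : List (Int × Int)) (p : Int × Int) (v : Int × Int)
    (hget : cells.get? p = some v) (hL : 1 ≤ v.1)
    (hwin1 : v.2 + v.1 ≤ t) (hwin2 : t < v.2 + 2 * v.1)
    (hord : ∀ c ∈ pre, ∀ w, cells.get? c = some w → w.2 ≤ v.2)
    (hG : ∀ q, pvInB limitX limitY q → cells.get? q = none →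
      ∀ c ∈ pvNbrs q, ∀ w, cells.get? c = some w → 1 ≤ w.1 → t < w.2 + w.1 + 1) :
    ∀ (nl : List (Int × Int)) (cl : PySem.Dict (Int × Int) Int),
    (∀ x ∈ nl, x ∈ pvNbrs p) → pvCI limitX limitY t cells (pre ++ [p]) cl →
    (nl.foldl
        (fun st q =>
          if 0 ≤ q.1 ∧ q.1 < limitX ∧ 0 ≤ q.2 ∧ q.2 < limitY ∧
              ((pvGet2 st.1 q.1 q.2).getD 0 0 = 0 ∨
                (q ∈ st.2 ∧ (pvGet2 st.1 q.1 q.2).getD 2 0 < v.1)) then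
            (pvSet2 st.1 q.1 q.2 [1, v.1, v.1], st.2 ++ [q])
          else st)
        (pvGrid limitX limitY (pvHyb cells t pre cl), cl.keys)
      = (pvGrid limitX limitY (pvHyb cells t pre (pvClInner limitX limitY cells v.1 nl cl)),
          (pvClInner limitX limitY cells v.1 nl cl).keys))
    ∧ pvCI limitX limitY t cells (pre ++ [p]) (pvClInner limitX limitY cells v.1 nl cl) := by
  intro nl
  induction nl with
  | nil => intro cl _ hCI; exact ⟨rfl, hCI⟩
  | cons q rest ih =>
    intro cl hsub hCI
    have hqnb : q ∈ pvNbrs p := hsub q (by simp)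
    have hsub' : ∀ x ∈ rest, x ∈ pvNbrs p := fun x hx => hsub x (by simp [hx])
    rw [List.foldl_cons]
    show (rest.foldl _
        (if 0 ≤ q.1 ∧ q.1 < limitX ∧ 0 ≤ q.2 ∧ q.2 < limitY ∧
            ((pvGet2 (pvGrid limitX limitY (pvHyb cells t pre cl)) q.1 q.2).getD 0 0 = 0 ∨
              (q ∈ cl.keys ∧
                (pvGet2 (pvGrid limitX limitY (pvHyb cells t pre cl)) q.1 q.2).getD 2 0 < v.1)) then
          (pvSet2 (pvGrid limitX limitY (pvHyb cells t pre cl)) q.1 q.2 [1, v.1, v.1], cl.keys ++ [q])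
        else (pvGrid limitX limitY (pvHyb cells t pre cl), cl.keys)) = _) ∧ _
    have hClcons : pvClInner limitX limitY cells v.1 (q :: rest) cl
        = pvClInner limitX limitY cells v.1 rest
            (if 0 ≤ q.1 ∧ q.1 < limitX ∧ 0 ≤ q.2 ∧ q.2 < limitY ∧
                cells.contains q = false ∧ cl.getD q 0 < v.1 then cl.insert q v.1 else cl) := rfl
    by_cases hinB : pvInB limitX limitY q
    · obtain ⟨hb1, hb2, hb3, hb4⟩ := hinB
      rcases hcq : cells.get? q with _ | w
      · -- q is an empty in-frame cell
        have hstart : v.2 + v.1 = t := by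
          have := hG q ⟨hb1, hb2, hb3, hb4⟩ hcq p (pvNbrs_symm p q hqnb) v hget hL
          omega
        rcases hclq : cl.get? q with _ | m
        · -- not yet claimed: both claim it
          have hnotmem : q ∉ cl.keys := (PySem.Dict.get?_eq_none_iff_not_mem_keys cl q).mp hclq
          have hnc : cells.contains q = false := (PySem.Dict.get?_eq_none_iff_contains cells q).mp hcq
          have hncl : cl.contains q = false := (PySem.Dict.get?_eq_none_iff_contains cl q).mp hclq
          have hg2 : pvGet2 (pvGrid limitX limitY (pvHyb cells t pre cl)) q.1 q.2 = [0, 0, 0] := by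
            rw [pvGrid_get2 limitX limitY _ q ⟨hb1, hb2, hb3, hb4⟩, pvHyb_unclaimed _ _ _ _ _ hclq, hcq]
          rw [if_pos (by rw [hg2]; exact ⟨hb1, hb2, hb3, hb4, Or.inl rfl⟩)]
          rw [hClcons, if_pos ⟨hb1, hb2, hb3, hb4, hnc,
            by rw [PySem.Dict.getD_eq_get?_getD, hclq]; exact hL⟩]
          have hCI' : pvCI limitX limitY t cells (pre ++ [p]) (cl.insert q v.1) := by
            constructor
            · rw [PySem.Dict.keys_insert_of_not_contains cl v.1 hncl]
              rw [List.nodup_append]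
              exact ⟨hCI.1, List.nodup_singleton q,
                by intro a ha b hb he; subst he; exact hnotmem (List.mem_singleton.mp hb ▸ ha)⟩
            · intro e he
              rw [PySem.Dict.items_insert_of_not_contains cl v.1 hncl, List.mem_append] at he
              rcases he with he | he
              · exact hCI.2 e he
              · simp only [List.mem_singleton] at he
                subst he
                exact ⟨hcq, ⟨hb1, hb2, hb3, hb4⟩, p, v, by simp, hget, rfl, hL, by omega, hqnb⟩
          have hgrid : pvSet2 (pvGrid limitX limitY (pvHyb cells t pre cl)) q.1 q.2 [1, v.1, v.1]
              = pvGrid limitX limitY (pvHyb cells t pre (cl.insert q v.1)) := by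
            rw [pvGrid_set2 limitX limitY _ q _ ⟨hb1, hb2, hb3, hb4⟩]
            apply pvGrid_congr
            intro r _
            unfold pvUpd
            by_cases hrq : r = q
            · subst hrq
              rw [if_pos rfl, pvHyb_claimed cells t pre _ r v.1 (PySem.Dict.get?_insert_self cl r v.1)]
            · rw [if_neg hrq]
              unfold pvHyb
              rw [PySem.Dict.get?_insert_of_ne cl v.1 hrq]
          have hkeys : cl.keys ++ [q] = (cl.insert q v.1).keys :=
            (PySem.Dict.keys_insert_of_not_contains cl v.1 hncl).symm
          rw [hgrid, hkeys]
          exact ih (cl.insert q v.1) hsub' hCI'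
        · -- already claimed this tick with life m >= v.1: neither side changes it
          have hmem : (q, m) ∈ cl.items := PySem.Dict.mem_items_of_get?_eq_some _ hclq
          obtain ⟨-, -, c, w, hcPP, hw, he2, hw1, hstartw, -⟩ := hCI.2 (q, m) hmem
          have hmge : ¬ (m < v.1) := by
            rcases List.mem_append.mp hcPP with hcpre | hcp
            · have := hord c hcpre w hw
              omega
            · simp only [List.mem_singleton] at hcp
              subst hcp
              rw [hget] at hw
              cases hw
              omega
          have hg2 : pvGet2 (pvGrid limitX limitY (pvHyb cells t pre cl)) q.1 q.2 = [1, m, m] := by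
            rw [pvGrid_get2 limitX limitY _ q ⟨hb1, hb2, hb3, hb4⟩, pvHyb_claimed cells t pre cl q m hclq]
          rw [if_neg (by
            rw [hg2]
            rintro ⟨-, -, -, -, h | h⟩
            · simp at h
            · exact hmge (by simpa using h.2))]
          rw [hClcons, if_neg (by
            rw [PySem.Dict.getD_of_get?_eq_some cl 0 hclq]
            exact fun hc => hmge hc.2.2.2.2.2)]
          exact ih cl hsub' hCI
      · -- q occupied by a cell: nobody claims it
        have hclq : cl.get? q = none := by
          rcases hclq : cl.get? q with _ | m
          · rfl
          · exact absurd hcq (by rw [pvCI_none limitX limitY t cells _ cl hCI q m hclq]; simp)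
        have hnotmem : q ∉ cl.keys := (PySem.Dict.get?_eq_none_iff_not_mem_keys cl q).mp hclq
        have hg2 : pvGet2 (pvGrid limitX limitY (pvHyb cells t pre cl)) q.1 q.2
            = pvRender (if q ∈ pre then t + 1 else t) w := by
          rw [pvGrid_get2 limitX limitY _ q ⟨hb1, hb2, hb3, hb4⟩, pvHyb_unclaimed _ _ _ _ _ hclq, hcq]
        rw [if_neg (by
          rw [hg2]
          rintro ⟨-, -, -, -, h | h⟩
          · exact pvRender_status_ne0 _ w h
          · exact hnotmem h.1)]
        rw [hClcons, if_neg (by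
          rintro ⟨-, -, -, -, hc, -⟩
          rw [PySem.Dict.contains_eq_isSome_get?, hcq] at hc
          simp at hc)]
        exact ih cl hsub' hCI
    · -- out of frame
      have hnin : ¬ (0 ≤ q.1 ∧ q.1 < limitX ∧ 0 ≤ q.2 ∧ q.2 < limitY) := by
        unfold pvInB at hinB; exact hinB
      rw [if_neg (by tauto)]
      rw [hClcons, if_neg (by tauto)]
      exact ih cl hsub' hCI

lemma pvQueueOf_nodup (t : Int) (cells : PySem.Dict (Int × Int) (Int × Int))
    (hnd : cells.keys.Nodup) : (pvQueueOf t cells).Nodup := by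
  unfold pvQueueOf
  exact List.Nodup.sublist (List.Sublist.map _ List.filter_sublist) hnd

lemma pvQueueOf_mem (t : Int) (cells : PySem.Dict (Int × Int) (Int × Int))
    (hnd : cells.keys.Nodup) (p : Int × Int) (hp : p ∈ pvQueueOf t cells) :
    cells.get? p = some (pvVal cells p) ∧ pvAliveB t (pvVal cells p) = true := by
  unfold pvQueueOf at hp
  obtain ⟨⟨q, w⟩, hmem, rfl⟩ := List.mem_map.mp hp
  obtain ⟨hitems, halive⟩ := List.mem_filter.mp hmem
  have hget := PySem.Dict.get?_of_mem_items _ hitems hnd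
  have : pvVal cells q = w := by unfold pvVal; rw [hget]; rfl
  rw [this, hget]
  exact ⟨rfl, halive⟩

lemma pvQueueOf_sorted (limitX limitY t : Int) (cells : PySem.Dict (Int × Int) (Int × Int))
    (hInv : pvInv limitX limitY t cells) :
    (pvQueueOf t cells).Pairwise (fun a b => (pvVal cells a).2 ≤ (pvVal cells b).2) := by
  obtain ⟨-, hnd, -, hsort, -⟩ := hInv
  unfold pvQueueOf
  rw [List.pairwise_map]
  have hsort' : cells.items.Pairwise (fun x y => x.2.2 ≤ y.2.2) := List.pairwise_map.mp hsort
  have hf := hsort'.filter (fun pv => pvAliveB t pv.2)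
  refine List.Pairwise.imp_of_mem ?_ hf
  intro a b ha hb hr
  have ha' := PySem.Dict.get?_of_mem_items _ (List.mem_of_mem_filter ha) hnd
  have hb' := PySem.Dict.get?_of_mem_items _ (List.mem_of_mem_filter hb) hnd
  unfold pvVal
  rw [ha', hb']
  exact hr

-- a processed coordinate advances the hybrid picture pointwise
lemma pvHyb_snoc (cells : PySem.Dict (Int × Int) (Int × Int)) (t : Int) (pre : List (Int × Int))
    (cl : PySem.Dict (Int × Int) Int) (p : Int × Int) (vp : Int × Int) (X : List Int)
    (hclp : cl.get? p = none) (hget : cells.get? p = some vp)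
    (hX : X = pvRender (t + 1) vp) :
    pvUpd (pvHyb cells t pre cl) p X = pvHyb cells t (pre ++ [p]) cl := by
  funext q
  unfold pvUpd pvHyb
  by_cases hqp : q = p
  · subst hqp
    rw [if_pos rfl, hclp, hget, hX]
    simp
  · rw [if_neg hqp]
    have h2 : (q ∈ pre ++ [p]) ↔ (q ∈ pre) := by simp [hqp]
    simp only [h2]

lemma pvHyb_snoc_stale (cells : PySem.Dict (Int × Int) (Int × Int)) (t : Int)
    (pre : List (Int × Int)) (cl : PySem.Dict (Int × Int) Int) (p : Int × Int) (vp : Int × Int)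
    (hget : cells.get? p = some vp) (hsame : pvRender (t + 1) vp = pvRender t vp) :
    pvHyb cells t (pre ++ [p]) cl = pvHyb cells t pre cl := by
  funext q
  unfold pvHyb
  by_cases hqp : q = p
  · subst hqp
    rw [hget]
    by_cases hqpre : q ∈ pre
    · simp [hqpre]
    · simp [hqpre, hsame]
  · have h2 : (q ∈ pre ++ [p]) ↔ (q ∈ pre) := by simp [hqp]
    simp only [h2]

def pvClQ (limitX limitY tau : Int) (cells : PySem.Dict (Int × Int) (Int × Int))
    (ks : List (Int × Int)) (cl : PySem.Dict (Int × Int) Int) : PySem.Dict (Int × Int) Int :=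
  ks.foldl (fun cl p => pvClStep limitX limitY tau cells cl (p, pvVal cells p)) cl

lemma pvFold_main (limitX limitY t : Int) (cells : PySem.Dict (Int × Int) (Int × Int))
    (hInv : pvInv limitX limitY t cells) :
    ∀ (suf pre : List (Int × Int)) (cl : PySem.Dict (Int × Int) Int) (pu : List (Int × Int)),
    pvQueueOf t cells = pre ++ suf →
    pvCI limitX limitY t cells pre cl →
    suf.foldl (pvProcStep limitX limitY)
        (pvGrid limitX limitY (pvHyb cells t pre cl), pu, cl.keys)
      = (pvGrid limitX limitY
            (pvHyb cells t (pre ++ suf) (pvClQ limitX limitY (t + 1) cells suf cl)),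
          pu ++ suf.filter (fun p => pvLive t (pvVal cells p)),
          (pvClQ limitX limitY (t + 1) cells suf cl).keys)
    ∧ pvCI limitX limitY t cells (pre ++ suf) (pvClQ limitX limitY (t + 1) cells suf cl) := by
  obtain ⟨ht0, hnd, hbounds, hsort, hG⟩ := hInv
  intro suf
  induction suf with
  | nil =>
    intro pre cl pu hq hCI
    refine ⟨?_, by simpa [pvClQ] using hCI⟩
    simp [pvClQ]
  | cons p rest ih =>
    intro pre cl pu hq hCI
    -- facts about the processed coordinate
    have hpq : p ∈ pvQueueOf t cells := by rw [hq]; simp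
    obtain ⟨hget, halive⟩ := pvQueueOf_mem t cells hnd p hpq
    have hpv_mem : (p, pvVal cells p) ∈ cells.items :=
      PySem.Dict.mem_items_of_get?_eq_some _ hget
    obtain ⟨hinB, hb0, hbt, hLne⟩ := hbounds (p, pvVal cells p) hpv_mem
    have hppre : p ∉ pre := by
      have hnq := pvQueueOf_nodup t cells hnd
      rw [hq, List.nodup_append] at hnq
      intro hmem
      exact hnq.2.2 p hmem p (by simp) rfl
    have hclp : cl.get? p = none := by
      rcases h : cl.get? p with _ | m
      · rfl
      · exact absurd hget (by rw [pvCI_none limitX limitY t cells pre cl hCI p m h]; simp)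
    have htr : pvGet2 (pvGrid limitX limitY (pvHyb cells t pre cl)) p.1 p.2
        = pvRender t (pvVal cells p) := by
      rw [pvGrid_get2 limitX limitY _ p hinB, pvHyb_unclaimed _ _ _ _ _ hclp, hget, if_neg hppre]
    set vp := pvVal cells p with hvp
    have hb0' : 0 ≤ vp.2 := hb0
    have hbt' : vp.2 ≤ t := hbt
    have hLpos : 1 ≤ vp.1 := hLne
    clear hb0 hbt hLne
    set cl' := pvClStep limitX limitY (t + 1) cells cl (p, vp) with hcl'def
    -- one processing step
    have hstep : pvProcStep limitX limitY
        (pvGrid limitX limitY (pvHyb cells t pre cl), pu, cl.keys) p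
        = (pvGrid limitX limitY (pvHyb cells t (pre ++ [p]) cl'),
            pu ++ (if pvLive t vp then [p] else []), cl'.keys) ∧
        pvCI limitX limitY t cells (pre ++ [p]) cl' := by
      by_cases hlat : vp.1 ≤ 0 ∨ t - vp.2 < vp.1
      · -- latent cell
        have hren : pvRender t vp = [1, vp.1 - (t - vp.2), vp.1] := by
          unfold pvRender; rw [if_pos hlat]
        have hlive : pvLive t vp = true := by unfold pvLive; simp; omega
        have hclstep : cl' = cl := by
          rw [hcl'def]
          unfold pvClStep
          rw [if_neg (by
            show ¬(vp.2 + vp.1 < t + 1 ∧ t + 1 ≤ vp.2 + 2 * vp.1)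
            omega)]
        constructor
        · simp only [pvProcStep, htr, hren]
          norm_num
          rw [hclstep, hlive]
          by_cases hr1 : vp.1 - (t - vp.2) = 1
          · rw [if_pos hr1]
            have hx : pvRender (t + 1) vp = [2, vp.1, vp.1] := by
              unfold pvRender
              rw [if_neg (by omega), if_pos (by omega)]
              have : 2 * vp.1 - (t + 1 - vp.2) = vp.1 := by omega
              rw [this]
            rw [pvGrid_setElem limitX limitY _ p 0 2 hinB]
            have e1 : ((pvHyb cells t pre cl) p).set 0 2 = [2, vp.1 - (t - vp.2), vp.1] := by
              rw [pvHyb_some cells t pre cl p vp hclp hget, if_neg hppre, hren]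
              rfl
            rw [e1, pvGrid_setElem limitX limitY _ p 1 _ hinB]
            have e2 : (pvUpd (pvHyb cells t pre cl) p [2, vp.1 - (t - vp.2), vp.1]) p
                = [2, vp.1 - (t - vp.2), vp.1] := by unfold pvUpd; rw [if_pos rfl]
            rw [e2]
            have e3 : pvUpd (pvUpd (pvHyb cells t pre cl) p [2, vp.1 - (t - vp.2), vp.1]) p
                ([2, vp.1 - (t - vp.2), vp.1].set 1 vp.1)
                = pvUpd (pvHyb cells t pre cl) p [2, vp.1, vp.1] := by
              funext q; unfold pvUpd; by_cases hqp : q = p <;> simp [hqp]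
            rw [e3, pvHyb_snoc cells t pre cl p vp _ hclp hget (by rw [hx])]
            exact ⟨rfl, rfl, rfl⟩
          · rw [if_neg hr1]
            have hx : pvRender (t + 1) vp = [1, vp.1 - (t - vp.2) - 1, vp.1] := by
              unfold pvRender
              rw [if_pos (by omega)]
              have : vp.1 - (t + 1 - vp.2) = vp.1 - (t - vp.2) - 1 := by omega
              rw [this]
            rw [pvGrid_setElem limitX limitY _ p 1 _ hinB]
            have e1 : ((pvHyb cells t pre cl) p).set 1 (vp.1 - (t - vp.2) - 1)
                = [1, vp.1 - (t - vp.2) - 1, vp.1] := by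
              rw [pvHyb_some cells t pre cl p vp hclp hget, if_neg hppre, hren]
              rfl
            rw [e1, pvHyb_snoc cells t pre cl p vp _ hclp hget (by rw [hx])]
            exact ⟨rfl, rfl, rfl⟩
        · rw [hclstep]
          exact pvCI_mono limitX limitY t cells pre _ cl (by intro x hx; simp [hx]) hCI
      · by_cases hact : t - vp.2 < 2 * vp.1
        · -- active cell
          have hL1 : 1 ≤ vp.1 := by omega
          have hren : pvRender t vp = [2, 2 * vp.1 - (t - vp.2), vp.1] := by
            unfold pvRender; rw [if_neg hlat, if_pos hact]
          have hlive : pvLive t vp = true := by unfold pvLive; simp; omega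
          have hord : ∀ c ∈ pre, ∀ w, cells.get? c = some w → w.2 ≤ vp.2 := by
            have hs := pvQueueOf_sorted limitX limitY t cells ⟨ht0, hnd, hbounds, hsort, hG⟩
            rw [hq, List.pairwise_append] at hs
            intro c hc w hw
            have := hs.2.2 c hc p (by simp)
            unfold pvVal at this
            rw [hw] at this
            exact this
          obtain ⟨hsp, hciI⟩ := pvSpread_inner limitX limitY t cells pre p vp hget hL1
            (by omega) (by omega) hord hG (pvNbrs p) cl (fun x hx => hx)
            (pvCI_mono limitX limitY t cells pre _ cl (by intro x hx; simp [hx]) hCI)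
          have hclstep : cl' = pvClInner limitX limitY cells vp.1 (pvNbrs p) cl := by
            rw [hcl'def]
            unfold pvClStep
            rw [if_pos (show vp.2 + vp.1 < t + 1 ∧ t + 1 ≤ vp.2 + 2 * vp.1 from
              ⟨by omega, by omega⟩)]
            rfl
          have hclpI : (pvClInner limitX limitY cells vp.1 (pvNbrs p) cl).get? p = none := by
            rcases h : (pvClInner limitX limitY cells vp.1 (pvNbrs p) cl).get? p with _ | m
            · rfl
            · exact absurd hget (by rw [pvCI_none limitX limitY t cells _ _ hciI p m h]; simp)
          constructor
          · simp only [pvProcStep, htr, hren]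
            norm_num
            rw [hlive, pvSpread_nbrs, hsp]
            have htrI : pvGet2 (pvGrid limitX limitY
                (pvHyb cells t pre (pvClInner limitX limitY cells vp.1 (pvNbrs p) cl))) p.1 p.2
                = [2, 2 * vp.1 - (t - vp.2), vp.1] := by
              rw [pvGrid_get2 limitX limitY _ p hinB, pvHyb_some cells t pre _ p vp hclpI hget,
                if_neg hppre, hren]
            by_cases hr1 : 2 * vp.1 - (t - vp.2) = 1
            · rw [if_pos hr1, pvGrid_setElem limitX limitY _ p 0 (-1) hinB]
              have e1 : ((pvHyb cells t pre (pvClInner limitX limitY cells vp.1 (pvNbrs p) cl)) p).set 0 (-1)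
                  = [-1, 2 * vp.1 - (t - vp.2), vp.1] := by
                rw [pvHyb_some cells t pre _ p vp hclpI hget, if_neg hppre, hren]
                rfl
              have hx : pvRender (t + 1) vp = [-1, 2 * vp.1 - (t - vp.2), vp.1] := by
                unfold pvRender
                rw [if_neg (by omega), if_neg (by omega), hr1]
              rw [e1, pvHyb_snoc cells t pre _ p vp _ hclpI hget (by rw [hx]), hclstep]
              exact ⟨rfl, rfl, rfl⟩
            · rw [if_neg hr1, pvGrid_setElem limitX limitY _ p 1 _ hinB]
              have e1 : ((pvHyb cells t pre (pvClInner limitX limitY cells vp.1 (pvNbrs p) cl)) p).set 1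
                    (2 * vp.1 - (t - vp.2) - 1)
                  = [2, 2 * vp.1 - (t - vp.2) - 1, vp.1] := by
                rw [pvHyb_some cells t pre _ p vp hclpI hget, if_neg hppre, hren]
                rfl
              have hx : pvRender (t + 1) vp = [2, 2 * vp.1 - (t - vp.2) - 1, vp.1] := by
                unfold pvRender
                rw [if_neg (by omega), if_pos (by omega)]
                have : 2 * vp.1 - (t + 1 - vp.2) = 2 * vp.1 - (t - vp.2) - 1 := by omega
                rw [this]
              rw [e1, pvHyb_snoc cells t pre _ p vp _ hclpI hget (by rw [hx]), hclstep]
              exact ⟨rfl, rfl, rfl⟩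
          · rw [hclstep]
            exact hciI
        · -- dead cell
          have hren : pvRender t vp = [-1, 1, vp.1] := by
            unfold pvRender; rw [if_neg hlat, if_neg hact]
          have hlive : pvLive t vp = false := by unfold pvLive; simp; omega
          have hclstep : cl' = cl := by
            rw [hcl'def]
            unfold pvClStep
            rw [if_neg (by
              show ¬(vp.2 + vp.1 < t + 1 ∧ t + 1 ≤ vp.2 + 2 * vp.1)
              omega)]
          have hsame : pvRender (t + 1) vp = pvRender t vp := by
            rw [hren]
            unfold pvRender
            rw [if_neg (by omega), if_neg (by omega)]
          constructor
          · simp only [pvProcStep, htr, hren]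
            norm_num
            rw [hclstep, hlive, pvHyb_snoc_stale cells t pre cl p vp hget hsame]
            simp
          · rw [hclstep]
            exact pvCI_mono limitX limitY t cells pre _ cl (by intro x hx; simp [hx]) hCI
    -- apply the induction hypothesis after the step
    rw [List.foldl_cons, hstep.1]
    have hq' : pvQueueOf t cells = (pre ++ [p]) ++ rest := by rw [hq]; simp
    obtain ⟨hmain, hciR⟩ := ih (pre ++ [p]) cl' (pu ++ (if pvLive t vp then [p] else [])) hq' hstep.2
    have eassoc : (pre ++ [p]) ++ rest = pre ++ p :: rest := by simp
    have eclq : pvClQ limitX limitY (t + 1) cells rest cl'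
        = pvClQ limitX limitY (t + 1) cells (p :: rest) cl := rfl
    constructor
    · rw [hmain, eassoc, eclq]
      have e3 : (pu ++ (if pvLive t vp then [p] else []))
            ++ rest.filter (fun q => pvLive t (pvVal cells q))
          = pu ++ (p :: rest).filter (fun q => pvLive t (pvVal cells q)) := by
        rw [List.filter_cons]
        by_cases hl : pvLive t vp = true
        · rw [if_pos hl, hvp] at *
          simp [hl]
        · have : pvLive t vp = false := by simpa using hl
          rw [this]
          simp [hvp ▸ this]
      rw [e3]
    · rw [eassoc, eclq] at hciR
      exact hciR

lemma pvHyb_empty (cells : PySem.Dict (Int × Int) (Int × Int)) (t : Int) :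
    pvHyb cells t [] PySem.Dict.empty = pvF cells t := by
  funext q
  unfold pvHyb pvF
  rw [PySem.Dict.get?_empty]
  rcases cells.get? q with _ | v
  · rfl
  · simp

lemma pvFoldl_filter_id {α β : Type} (l : List α) (q : α → Bool) (f : β → α → β) (b : β)
    (h : ∀ acc, ∀ x ∈ l, q x = false → f acc x = acc) :
    l.foldl f b = (l.filter q).foldl f b := by
  induction l generalizing b with
  | nil => rfl
  | cons x xs ih =>
    rw [List.foldl_cons, List.filter_cons]
    by_cases hx : q x = true
    · rw [if_pos hx, List.foldl_cons]
      exact ih (f b x) (fun acc y hy hqy => h acc y (by simp [hy]) hqy)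
    · rw [if_neg hx, h b x (by simp) (by simpa using hx)]
      exact ih b (fun acc y hy hqy => h acc y (by simp [hy]) hqy)

-- B's claims fold over the items is the claims fold over the live queue
lemma pvClaims_eq_clQ (limitX limitY t : Int) (cells : PySem.Dict (Int × Int) (Int × Int))
    (hnd : cells.keys.Nodup) :
    pvClaims limitX limitY (t + 1) cells
      = pvClQ limitX limitY (t + 1) cells (pvQueueOf t cells) PySem.Dict.empty := by
  rw [pvClaims_eq_fold]
  unfold pvClQ pvQueueOf
  rw [List.foldl_map]
  rw [pvFoldl_filter_id cells.items (fun pv => pvAliveB t pv.2)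
    (pvClStep limitX limitY (t + 1) cells) PySem.Dict.empty ?_]
  · apply PySem.List.foldl_congr_mem
    intro acc pv hpv
    have hget := PySem.Dict.get?_of_mem_items _ (List.mem_of_mem_filter hpv) hnd
    have heq : (pv.1, pvVal cells pv.1) = pv := by
      unfold pvVal
      rw [hget]
      rfl
    rw [heq]
  · intro acc pv hpv hq
    unfold pvClStep
    rw [if_neg ?_]
    intro hcond
    unfold pvAliveB at hq
    simp only [decide_eq_false_iff_not] at hq
    omega

-- the cells dict after committing the tick's claims
def pvCommitCells (tau : Int) (cl : PySem.Dict (Int × Int) Int)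
    (cells : PySem.Dict (Int × Int) (Int × Int)) : PySem.Dict (Int × Int) (Int × Int) :=
  cl.items.foldl (fun c p => c.insert p.1 (p.2, tau)) cells

lemma pvCommitCells_items (tau : Int) (cl : PySem.Dict (Int × Int) Int)
    (cells : PySem.Dict (Int × Int) (Int × Int))
    (hfresh : ∀ e ∈ cl.items, cells.contains e.1 = false) (hclnd : cl.keys.Nodup) :
    (pvCommitCells tau cl cells).items
      = cells.items ++ cl.items.map (fun e => (e.1, (e.2, tau))) := by
  unfold pvCommitCells
  exact PySem.Dict.items_foldl_insert_fresh cl.items (fun e => e.1) (fun e => (e.2, tau)) cells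
    hfresh hclnd

lemma pvCommitCells_keys (tau : Int) (cl : PySem.Dict (Int × Int) Int)
    (cells : PySem.Dict (Int × Int) (Int × Int))
    (hfresh : ∀ e ∈ cl.items, cells.contains e.1 = false) (hclnd : cl.keys.Nodup) :
    (pvCommitCells tau cl cells).keys = cells.keys ++ cl.keys := by
  have h := pvCommitCells_items tau cl cells hfresh hclnd
  show (pvCommitCells tau cl cells).items.map _ = cells.items.map _ ++ cl.items.map _
  rw [h, List.map_append, List.map_map]
  rfl

lemma pvCommitCells_nodup (tau : Int) (cl : PySem.Dict (Int × Int) Int)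
    (cells : PySem.Dict (Int × Int) (Int × Int))
    (hfresh : ∀ e ∈ cl.items, cells.contains e.1 = false) (hclnd : cl.keys.Nodup)
    (hnd : cells.keys.Nodup) : (pvCommitCells tau cl cells).keys.Nodup := by
  rw [pvCommitCells_keys tau cl cells hfresh hclnd, List.nodup_append]
  refine ⟨hnd, hclnd, ?_⟩
  intro a ha b hb hab
  subst hab
  obtain ⟨⟨k, m⟩, hmem, rfl⟩ := List.mem_map.mp hb
  have hh := hfresh (k, m) hmem
  have h3 := (PySem.Dict.contains_iff_mem_keys cells (k, m).1).mpr ha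
  rw [hh] at h3
  cases h3

lemma pvCommitCells_get?_old (tau : Int) (cl : PySem.Dict (Int × Int) Int)
    (cells : PySem.Dict (Int × Int) (Int × Int))
    (hfresh : ∀ e ∈ cl.items, cells.contains e.1 = false) (hclnd : cl.keys.Nodup)
    (hnd : cells.keys.Nodup) (p : Int × Int) (v : Int × Int) (hc : cells.get? p = some v) :
    (pvCommitCells tau cl cells).get? p = some v := by
  rw [PySem.Dict.get?_eq_some_iff_mem_items _ _ _ (pvCommitCells_nodup tau cl cells hfresh hclnd hnd),
    pvCommitCells_items tau cl cells hfresh hclnd, List.mem_append]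
  exact Or.inl (PySem.Dict.mem_items_of_get?_eq_some _ hc)

lemma pvCommitCells_get?_new (tau : Int) (cl : PySem.Dict (Int × Int) Int)
    (cells : PySem.Dict (Int × Int) (Int × Int))
    (hfresh : ∀ e ∈ cl.items, cells.contains e.1 = false) (hclnd : cl.keys.Nodup)
    (hnd : cells.keys.Nodup) (p : Int × Int) (m : Int) (hcl : cl.get? p = some m) :
    (pvCommitCells tau cl cells).get? p = some (m, tau) := by
  rw [PySem.Dict.get?_eq_some_iff_mem_items _ _ _ (pvCommitCells_nodup tau cl cells hfresh hclnd hnd),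
    pvCommitCells_items tau cl cells hfresh hclnd, List.mem_append]
  refine Or.inr (List.mem_map.mpr ⟨(p, m), PySem.Dict.mem_items_of_get?_eq_some _ hcl, rfl⟩)

lemma pvCommitCells_get?_none (tau : Int) (cl : PySem.Dict (Int × Int) Int)
    (cells : PySem.Dict (Int × Int) (Int × Int))
    (hfresh : ∀ e ∈ cl.items, cells.contains e.1 = false) (hclnd : cl.keys.Nodup)
    (p : Int × Int) (hc : cells.get? p = none) (hcl : cl.get? p = none) :
    (pvCommitCells tau cl cells).get? p = none := by
  rw [PySem.Dict.get?_eq_none_iff_not_mem_keys] at hc hcl ⊢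
  rw [pvCommitCells_keys tau cl cells hfresh hclnd, List.mem_append]
  rintro (h | h)
  · exact hc h
  · exact hcl h

lemma pvClInner_keys_mono (limitX limitY : Int) (cells : PySem.Dict (Int × Int) (Int × Int))
    (L : Int) (nl : List (Int × Int)) :
    ∀ (cl : PySem.Dict (Int × Int) Int) (x : Int × Int), x ∈ cl.keys →
    x ∈ (pvClInner limitX limitY cells L nl cl).keys := by
  induction nl with
  | nil => intro cl x hx; exact hx
  | cons y rest ih =>
    intro cl x hx
    have hcons : pvClInner limitX limitY cells L (y :: rest) cl
        = pvClInner limitX limitY cells L rest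
            (if 0 ≤ y.1 ∧ y.1 < limitX ∧ 0 ≤ y.2 ∧ y.2 < limitY ∧ cells.contains y = false ∧ cl.getD y 0 < L then cl.insert y L else cl) := rfl
    rw [hcons]
    split_ifs with h
    · exact ih _ x (by rw [PySem.Dict.mem_keys_insert]; exact Or.inr hx)
    · exact ih cl x hx

lemma pvClInner_mem (limitX limitY : Int) (cells : PySem.Dict (Int × Int) (Int × Int))
    (L : Int) (hL1 : 1 ≤ L) (p : Int × Int) (hinB : pvInB limitX limitY p)
    (hcont : cells.contains p = false) (nl : List (Int × Int)) :
    ∀ (cl : PySem.Dict (Int × Int) Int), p ∈ nl →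
    p ∈ (pvClInner limitX limitY cells L nl cl).keys := by
  induction nl with
  | nil => intro cl h; cases h
  | cons y rest ih =>
    intro cl hp
    have hcons : pvClInner limitX limitY cells L (y :: rest) cl
        = pvClInner limitX limitY cells L rest
            (if 0 ≤ y.1 ∧ y.1 < limitX ∧ 0 ≤ y.2 ∧ y.2 < limitY ∧ cells.contains y = false ∧ cl.getD y 0 < L then cl.insert y L else cl) := rfl
    rw [hcons]
    by_cases hpr : p ∈ rest
    · split_ifs <;> exact ih _ hpr
    · have hyp : y = p := by
        rcases List.mem_cons.mp hp with h | h
        · exact h.symm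
        · exact absurd h hpr
      subst hyp
      by_cases hgd : cl.getD y 0 < L
      · rw [if_pos ⟨hinB.1, hinB.2.1, hinB.2.2.1, hinB.2.2.2, hcont, hgd⟩]
        exact pvClInner_keys_mono limitX limitY cells L rest _ y
          (by rw [PySem.Dict.mem_keys_insert]; exact Or.inl rfl)
      · have hmem : y ∈ cl.keys := by
          by_contra hnm
          have hcf : cl.contains y = false := by
            cases h : cl.contains y
            · rfl
            · exact absurd ((PySem.Dict.contains_iff_mem_keys cl y).mp h) hnm
          rw [PySem.Dict.getD_of_not_contains cl 0 hcf] at hgd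
          omega
        split_ifs with h
        · exact pvClInner_keys_mono limitX limitY cells L rest _ y
            (by rw [PySem.Dict.mem_keys_insert]; exact Or.inr hmem)
        · exact pvClInner_keys_mono limitX limitY cells L rest cl y hmem

lemma pvClQ_keys_mono (limitX limitY tau : Int) (cells : PySem.Dict (Int × Int) (Int × Int))
    (ks : List (Int × Int)) :
    ∀ (cl : PySem.Dict (Int × Int) Int) (x : Int × Int), x ∈ cl.keys →
    x ∈ (pvClQ limitX limitY tau cells ks cl).keys := by
  induction ks with
  | nil => intro cl x hx; exact hx
  | cons q rest ih =>
    intro cl x hx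
    have hcons : pvClQ limitX limitY tau cells (q :: rest) cl
        = pvClQ limitX limitY tau cells rest
            (pvClStep limitX limitY tau cells cl (q, pvVal cells q)) := rfl
    rw [hcons]
    refine ih _ x ?_
    unfold pvClStep
    split_ifs with h
    · exact pvClInner_keys_mono limitX limitY cells _ _ cl x hx
    · exact hx

lemma pvClQ_covers (limitX limitY t : Int) (cells : PySem.Dict (Int × Int) (Int × Int))
    (ks : List (Int × Int)) :
    ∀ (cl : PySem.Dict (Int × Int) Int) (q : Int × Int) (w : Int × Int) (p : Int × Int),
    q ∈ ks → cells.get? q = some w → 1 ≤ w.1 → w.2 + w.1 + 1 ≤ t + 1 → t + 1 ≤ w.2 + 2 * w.1 →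
    p ∈ pvNbrs q → pvInB limitX limitY p → cells.contains p = false →
    p ∈ (pvClQ limitX limitY (t + 1) cells ks cl).keys := by
  induction ks with
  | nil => intro _ _ _ _ h; cases h
  | cons x rest ih =>
    intro cl q w p hq hw hw1 hs1 hs2 hnb hinB hcont
    have hcons : pvClQ limitX limitY (t + 1) cells (x :: rest) cl
        = pvClQ limitX limitY (t + 1) cells rest
            (pvClStep limitX limitY (t + 1) cells cl (x, pvVal cells x)) := rfl
    rw [hcons]
    by_cases hxq : x = q
    · subst hxq
      have hval : pvVal cells x = w := by unfold pvVal; rw [hw]; rfl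
      have hstep : pvClStep limitX limitY (t + 1) cells cl (x, pvVal cells x)
          = pvClInner limitX limitY cells w.1 (pvNbrs x) cl := by
        unfold pvClStep
        rw [hval, if_pos (show w.2 + w.1 < t + 1 ∧ t + 1 ≤ w.2 + 2 * w.1 from ⟨by omega, hs2⟩)]
        rfl
      rw [hstep]
      exact pvClQ_keys_mono limitX limitY (t + 1) cells rest _ p
        (pvClInner_mem limitX limitY cells w.1 hw1 p hinB hcont (pvNbrs x) cl hnb)
    · rcases List.mem_cons.mp hq with h | h
      · exact absurd h.symm hxq
      · exact ih _ q w p h hw hw1 hs1 hs2 hnb hinB hcont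

-- ---- horizon bookkeeping ----

-- the horizon bounds every death tick and is attained (or is still 0)
def pvHsp (h : Int) (cells : PySem.Dict (Int × Int) (Int × Int)) : Prop :=
  (∀ pv ∈ cells.items, pv.2.2 + 2 * pv.2.1 ≤ h) ∧
  (h = 0 ∨ ∃ pv ∈ cells.items, pv.2.2 + 2 * pv.2.1 = h)

lemma pvFoldl_max_spec (l : List Int) (h0 : Int) :
    h0 ≤ l.foldl max h0 ∧ (∀ x ∈ l, x ≤ l.foldl max h0) ∧
      (l.foldl max h0 = h0 ∨ l.foldl max h0 ∈ l) := by
  induction l generalizing h0 with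
  | nil => simp
  | cons a l ih =>
    obtain ⟨ih1, ih2, ih3⟩ := ih (max h0 a)
    rw [List.foldl_cons]
    refine ⟨le_trans (le_max_left _ _) ih1, ?_, ?_⟩
    · intro x hx
      rcases List.mem_cons.mp hx with rfl | hx
      · exact le_trans (le_max_right _ _) ih1
      · exact ih2 x hx
    · rcases ih3 with h | h
      · rcases max_choice h0 a with hc | hc
        · rw [h, hc]; exact Or.inl rfl
        · rw [h, hc]; exact Or.inr List.mem_cons_self
      · exact Or.inr (List.mem_cons_of_mem _ h)

-- B's commit fold splits into the cells fold and the horizon fold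
lemma pvCommit_split (t : Int) (cl : PySem.Dict (Int × Int) Int)
    (cells : PySem.Dict (Int × Int) (Int × Int)) (h : Int) :
    pvCommit t cl (cells, h)
      = (pvCommitCells t cl cells, (cl.items.map (fun e => t + 2 * e.2)).foldl max h) := by
  have key : ∀ (l : List ((Int × Int) × Int)) (c : PySem.Dict (Int × Int) (Int × Int)) (h : Int),
      l.foldl (fun st p => (st.1.insert p.1 (p.2, t), max st.2 (t + 2 * p.2))) (c, h)
        = (l.foldl (fun c p => c.insert p.1 (p.2, t)) c,
            l.foldl (fun h e => max h (t + 2 * e.2)) h) := by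
    intro l
    induction l with
    | nil => intro c h; rfl
    | cons a l ih => intro c h; rw [List.foldl_cons, List.foldl_cons, List.foldl_cons]; exact ih _ _
  rw [List.foldl_map]
  exact key cl.items cells h

-- ---- queue membership ----

lemma pvQueueOf_eq_nil_iff (t : Int) (cells : PySem.Dict (Int × Int) (Int × Int)) :
    pvQueueOf t cells = [] ↔ ∀ pv ∈ cells.items, pvAliveB t pv.2 = false := by
  unfold pvQueueOf
  rw [List.map_eq_nil_iff, List.filter_eq_nil_iff]
  constructor
  · intro h pv hpv; simpa using h pv hpv
  · intro h pv hpv; simp [h pv hpv]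

lemma pvMem_queueOf (t : Int) (cells : PySem.Dict (Int × Int) (Int × Int))
    (hnd : cells.keys.Nodup) (p : Int × Int) (v : Int × Int) (hget : cells.get? p = some v) :
    p ∈ pvQueueOf t cells ↔ pvAliveB t v = true := by
  have hv : pvVal cells p = v := by unfold pvVal; rw [hget]; rfl
  constructor
  · intro hp
    obtain ⟨-, h2⟩ := pvQueueOf_mem t cells hnd p hp
    rw [hv] at h2
    exact h2
  · intro ha
    exact List.mem_map.mpr ⟨(p, v),
      List.mem_filter.mpr ⟨PySem.Dict.mem_items_of_get?_eq_some _ hget, ha⟩, rfl⟩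

-- ---- the map and the queue after one full tick ----

lemma pvPostTick_grid (t : Int) (cells : PySem.Dict (Int × Int) (Int × Int))
    (clQ : PySem.Dict (Int × Int) Int)
    (hnd : cells.keys.Nodup)
    (hLpos : ∀ pv ∈ cells.items, 1 ≤ pv.2.1)
    (hfresh : ∀ e ∈ clQ.items, cells.contains e.1 = false)
    (hclnd : clQ.keys.Nodup)
    (hmpos : ∀ e ∈ clQ.items, 1 ≤ e.2) :
    pvHyb cells t (pvQueueOf t cells) clQ = pvF (pvCommitCells (t + 1) clQ cells) (t + 1) := by
  funext p
  rcases hcl : clQ.get? p with _ | m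
  · rcases hc : cells.get? p with _ | v
    · rw [pvHyb_unclaimed _ _ _ _ _ hcl]
      unfold pvF
      rw [pvCommitCells_get?_none (t + 1) clQ cells hfresh hclnd p hc hcl, hc]
    · rw [pvHyb_some cells t _ clQ p v hcl hc]
      unfold pvF
      rw [pvCommitCells_get?_old (t + 1) clQ cells hfresh hclnd hnd p v hc]
      by_cases hq : p ∈ pvQueueOf t cells
      · rw [if_pos hq]
      · rw [if_neg hq]
        have ha : pvAliveB t v = false := by
          cases h : pvAliveB t v
          · rfl
          · exact absurd ((pvMem_queueOf t cells hnd p v hc).mpr h) hq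
        have hL := hLpos (p, v) (PySem.Dict.mem_items_of_get?_eq_some _ hc)
        unfold pvAliveB at ha
        simp only [decide_eq_false_iff_not] at ha
        have e1 : pvRender t v = [-1, 1, v.1] := by
          unfold pvRender; rw [if_neg (by omega), if_neg (by omega)]
        have e2 : pvRender (t + 1) v = [-1, 1, v.1] := by
          unfold pvRender; rw [if_neg (by omega), if_neg (by omega)]
        rw [e1]
        exact e2.symm
  · rw [pvHyb_claimed _ _ _ _ _ _ hcl]
    unfold pvF
    rw [pvCommitCells_get?_new (t + 1) clQ cells hfresh hclnd hnd p m hcl]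
    have hm := hmpos (p, m) (PySem.Dict.mem_items_of_get?_eq_some _ hcl)
    have : pvRender (t + 1) (m, t + 1) = [1, m, m] := by
      unfold pvRender
      rw [if_pos (by right; simp; omega)]
      norm_num
    exact this.symm

lemma pvQueue_next (t : Int) (cells : PySem.Dict (Int × Int) (Int × Int))
    (clQ : PySem.Dict (Int × Int) Int)
    (hnd : cells.keys.Nodup)
    (hfresh : ∀ e ∈ clQ.items, cells.contains e.1 = false)
    (hclnd : clQ.keys.Nodup) :
    (pvQueueOf t cells).filter (fun p => pvLive t (pvVal cells p)) ++ clQ.keys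
      = pvQueueOf (t + 1) (pvCommitCells (t + 1) clQ cells) := by
  unfold pvQueueOf
  rw [pvCommitCells_items (t + 1) clQ cells hfresh hclnd, List.filter_append, List.map_append]
  congr 1
  · rw [List.filter_map, List.filter_filter]
    congr 1
    apply List.filter_congr
    intro pv hpv
    have hget := PySem.Dict.get?_of_mem_items _ hpv hnd
    have hval : pvVal cells pv.1 = pv.2 := by unfold pvVal; rw [hget]; rfl
    rw [Bool.eq_iff_iff]
    simp only [Function.comp_apply, Bool.and_eq_true, pvAliveB, pvLive, hval,
      decide_eq_true_eq]
    omega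
  · rw [List.filter_map, List.map_map]
    have hall : ∀ e ∈ clQ.items,
        ((fun pv => pvAliveB (t + 1) pv.2) ∘ fun e => ((e.1, (e.2, t + 1)) : (Int × Int) × (Int × Int))) e = true := by
      intro e he
      show pvAliveB (t + 1) (e.2, t + 1) = true
      unfold pvAliveB
      simp only [decide_eq_true_eq]
      omega
    rw [List.filter_eq_self.mpr hall]
    rfl

lemma pvPairwise_const (l : List Int) (c : Int) (h : ∀ x ∈ l, x = c) : l.Pairwise (· ≤ ·) := by
  induction l with
  | nil => exact List.Pairwise.nil
  | cons a l ih =>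
    refine List.Pairwise.cons ?_ (ih (fun x hx => h x (by simp [hx])))
    intro b hb
    rw [h a (by simp), h b (by simp [hb])]

lemma pvInv_next (lx ly t : Int) (cells : PySem.Dict (Int × Int) (Int × Int))
    (hInv : pvInv lx ly t cells)
    (hCI : pvCI lx ly t cells (pvQueueOf t cells)
      (pvClQ lx ly (t + 1) cells (pvQueueOf t cells) PySem.Dict.empty)) :
    pvInv lx ly (t + 1)
      (pvCommitCells (t + 1)
        (pvClQ lx ly (t + 1) cells (pvQueueOf t cells) PySem.Dict.empty) cells) := by
  obtain ⟨ht0, hnd, hbounds, hsort, hG⟩ := hInv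
  set clQ := pvClQ lx ly (t + 1) cells (pvQueueOf t cells) PySem.Dict.empty with hclQ
  have hclnd := hCI.1
  have hfresh : ∀ e ∈ clQ.items, cells.contains e.1 = false := fun e he =>
    (PySem.Dict.get?_eq_none_iff_contains cells e.1).mp (hCI.2 e he).1
  refine ⟨by omega, pvCommitCells_nodup _ _ _ hfresh hclnd hnd, ?_, ?_, ?_⟩
  · intro pv hpv
    rw [pvCommitCells_items _ _ _ hfresh hclnd, List.mem_append] at hpv
    rcases hpv with h | h
    · obtain ⟨hB, h0, h1, h2⟩ := hbounds pv h
      exact ⟨hB, h0, by omega, h2⟩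
    · obtain ⟨e, he, rfl⟩ := List.mem_map.mp h
      obtain ⟨-, hB, c, v, -, -, he2, hv1, -, -⟩ := hCI.2 e he
      exact ⟨hB, show (0 : Int) ≤ t + 1 by omega, show t + 1 ≤ t + 1 by omega,
        show (1 : Int) ≤ e.2 by omega⟩
  · rw [pvCommitCells_items _ _ _ hfresh hclnd, List.map_append, List.pairwise_append]
    refine ⟨hsort, ?_, ?_⟩
    · rw [List.map_map]
      exact pvPairwise_const _ (t + 1) (by intro x hx; obtain ⟨e, he, rfl⟩ := List.mem_map.mp hx; rfl)
    · intro a ha b hb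
      obtain ⟨pv, hpv, rfl⟩ := List.mem_map.mp ha
      rw [List.map_map] at hb
      obtain ⟨e, he, rfl⟩ := List.mem_map.mp hb
      have := (hbounds pv hpv).2.2.1
      show pv.2.2 ≤ t + 1
      omega
  · intro p hp hnone q hq v hv hv1
    have hpk : p ∉ (pvCommitCells (t + 1) clQ cells).keys :=
      (PySem.Dict.get?_eq_none_iff_not_mem_keys _ p).mp hnone
    rw [pvCommitCells_keys _ _ _ hfresh hclnd, List.mem_append] at hpk
    push_neg at hpk
    have hpc : cells.get? p = none := (PySem.Dict.get?_eq_none_iff_not_mem_keys cells p).mpr hpk.1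
    rcases hcq : cells.get? q with _ | w
    · -- q is a freshly committed cell, born at t + 1
      have hmem := PySem.Dict.mem_items_of_get?_eq_some _ hv
      rw [pvCommitCells_items _ _ _ hfresh hclnd, List.mem_append] at hmem
      rcases hmem with hmem | hmem
      · have := PySem.Dict.get?_of_mem_items _ hmem hnd
        rw [hcq] at this
        cases this
      · obtain ⟨e, he, heq⟩ := List.mem_map.mp hmem
        have hv2 : v.2 = t + 1 := by
          have h2 := congrArg (fun x : (Int × Int) × (Int × Int) => x.2.2) heq
          simpa using h2.symm
        omega
    · -- q was already present
      have hvw : v = w := by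
        have := pvCommitCells_get?_old (t + 1) clQ cells hfresh hclnd hnd q w hcq
        rw [hv] at this
        exact Option.some_inj.mp this
      subst hvw
      have hGold := hG p hp hpc q hq v hcq hv1
      by_contra hcon
      have hstart : v.2 + v.1 + 1 = t + 1 := by omega
      have hqmem : q ∈ pvQueueOf t cells := by
        rw [pvMem_queueOf t cells hnd q v hcq]
        unfold pvAliveB
        simp only [decide_eq_true_eq]
        omega
      have hcov := pvClQ_covers lx ly t cells (pvQueueOf t cells) PySem.Dict.empty q v p
        hqmem hcq hv1 (by omega) (by omega) (pvNbrs_symm p q hq) hp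
        ((PySem.Dict.get?_eq_none_iff_contains cells p).mp hpc)
      exact hpk.2 hcov

lemma pvHsp_next (t h : Int) (cells : PySem.Dict (Int × Int) (Int × Int))
    (clQ : PySem.Dict (Int × Int) Int)
    (hfresh : ∀ e ∈ clQ.items, cells.contains e.1 = false) (hclnd : clQ.keys.Nodup)
    (hHsp : pvHsp h cells) :
    pvHsp ((clQ.items.map (fun e => (t + 1) + 2 * e.2)).foldl max h)
      (pvCommitCells (t + 1) clQ cells) := by
  obtain ⟨hspec1, hspec2, hspec3⟩ := pvFoldl_max_spec (clQ.items.map (fun e => (t + 1) + 2 * e.2)) h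
  constructor
  · intro pv hpv
    rw [pvCommitCells_items _ _ _ hfresh hclnd, List.mem_append] at hpv
    rcases hpv with hp | hp
    · exact le_trans (hHsp.1 pv hp) hspec1
    · obtain ⟨e, he, rfl⟩ := List.mem_map.mp hp
      have hm : (t + 1) + 2 * e.2 ∈ clQ.items.map (fun e => (t + 1) + 2 * e.2) :=
        List.mem_map_of_mem he
      have := hspec2 _ hm
      simpa using this
  · rcases hspec3 with hF | hF
    · rcases hHsp.2 with h0 | ⟨pv, hpv, hd⟩
      · exact Or.inl (by omega)
      · refine Or.inr ⟨pv, ?_, by omega⟩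
        rw [pvCommitCells_items _ _ _ hfresh hclnd]
        exact List.mem_append_left _ hpv
    · right
      obtain ⟨e, he, hfe⟩ := List.mem_map.mp hF
      refine ⟨(e.1, (e.2, t + 1)), ?_, by simpa using hfe⟩
      rw [pvCommitCells_items _ _ _ hfresh hclnd]
      exact List.mem_append_right _ (List.mem_map_of_mem he)

-- ---- one full tick, assembled ----

lemma pvTick_eq (lx ly t : Int) (cells : PySem.Dict (Int × Int) (Int × Int))
    (hInv : pvInv lx ly t cells) :
    pvTickA lx ly (pvQueueOf t cells).length (pvQueueOf t cells)
        (pvGrid lx ly (pvF cells t)) []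
      = ((pvQueueOf t cells).filter (fun p => pvLive t (pvVal cells p)),
          pvGrid lx ly (pvHyb cells t (pvQueueOf t cells)
            (pvClQ lx ly (t + 1) cells (pvQueueOf t cells) PySem.Dict.empty)),
          (pvClQ lx ly (t + 1) cells (pvQueueOf t cells) PySem.Dict.empty).keys)
    ∧ pvCI lx ly t cells (pvQueueOf t cells)
        (pvClQ lx ly (t + 1) cells (pvQueueOf t cells) PySem.Dict.empty) := by
  have hCIe : pvCI lx ly t cells [] PySem.Dict.empty := by
    constructor
    · exact List.nodup_nil
    · intro e he
      cases he
  obtain ⟨hmain, hci⟩ := pvFold_main lx ly t cells hInv (pvQueueOf t cells) [] PySem.Dict.empty []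
    (by simp) hCIe
  rw [pvHyb_empty,
    show (PySem.Dict.empty : PySem.Dict (Int × Int) Int).keys = [] from rfl] at hmain
  simp only [List.nil_append] at hmain hci
  have h0 := pvTickA_eq_fold lx ly (pvQueueOf t cells) [] (pvGrid lx ly (pvF cells t)) []
  rw [List.append_nil] at h0
  refine ⟨?_, hci⟩
  rw [h0, hmain]
  simp

lemma pvLoopA_nil (lx ly : Int) (f : Nat) (wm : List (List (List Int))) :
    pvLoopA lx ly f [] wm = wm := by
  cases f with
  | zero => rfl
  | succ f => simp [pvLoopA]

lemma pvLoopA_succ (lx ly : Int) (f : Nat) (q : List (Int × Int)) (wm : List (List (List Int))) :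
    pvLoopA lx ly (f + 1) q wm
      = if q = [] then wm
        else pvLoopA lx ly f
          ((pvTickA lx ly q.length q wm []).1 ++ (pvTickA lx ly q.length q wm []).2.2)
          (pvTickA lx ly q.length q wm []).2.1 := rfl

lemma pvLoopB_succ (lx ly : Int) (f : Nat) (t h : Int)
    (cells : PySem.Dict (Int × Int) (Int × Int)) :
    pvLoopB lx ly (f + 1) t h cells
      = if h < t then cells
        else pvLoopB lx ly f (t + 1) (pvCommit t (pvClaims lx ly t cells) (cells, h)).2
          (pvCommit t (pvClaims lx ly t cells) (cells, h)).1 := rfl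

-- ---- the main simulation ----

lemma pvSim (lx ly : Int) (f : Nat) :
    ∀ (t h : Int) (cells : PySem.Dict (Int × Int) (Int × Int)),
    pvInv lx ly t cells → pvHsp h cells →
    (pvLoopA lx ly f (pvQueueOf t cells) (pvGrid lx ly (pvF cells t))).foldl
        (fun acc row => row.foldl (fun acc cell => if 1 ≤ cell.getD 0 0 then acc + 1 else acc) acc) 0
      = (((pvLoopB lx ly f (t + 1) h cells).items.filter
            (fun pv => decide (t + (f : Int) < pv.2.2 + 2 * pv.2.1))).length : Int) := by
  induction f with
  | zero =>
    intro t h cells hInv hHsp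
    show (pvGrid lx ly (pvF cells t)).foldl _ 0
        = ((cells.items.filter
            (fun pv => decide (t + ((0 : Nat) : Int) < pv.2.2 + 2 * pv.2.1))).length : Int)
    rw [pvCountA_grid lx ly t cells hInv.2.1 (fun pv hpv => (hInv.2.2.1 pv hpv).1)]
    congr 2
    apply List.filter_congr
    intro pv hpv
    have hL := (hInv.2.2.1 pv hpv).2.2.2
    rw [Bool.eq_iff_iff]
    simp only [pvLive, decide_eq_true_eq]
    omega
  | succ f ih =>
    intro t h cells hInv hHsp
    have hnd := hInv.2.1
    have hLpos : ∀ pv ∈ cells.items, 1 ≤ pv.2.1 := fun pv hpv => (hInv.2.2.1 pv hpv).2.2.2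
    by_cases hqnil : pvQueueOf t cells = []
    · -- both loops stop with everything dead
      have hdead := (pvQueueOf_eq_nil_iff t cells).mp hqnil
      have hbreak : h < t + 1 := by
        rcases hHsp.2 with h0 | ⟨pv, hpv, hd⟩
        · have := hInv.1; omega
        · have ha := hdead pv hpv
          have hL := hLpos pv hpv
          unfold pvAliveB at ha
          simp only [decide_eq_false_iff_not] at ha
          omega
      rw [hqnil, pvLoopA_nil,
        show pvLoopB lx ly (f + 1) (t + 1) h cells = cells from by
          rw [pvLoopB_succ, if_pos hbreak],
        pvCountA_grid lx ly t cells hnd (fun pv hpv => (hInv.2.2.1 pv hpv).1)]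
      have e1 : cells.items.filter (fun pv => pvLive t pv.2) = [] := by
        rw [List.filter_eq_nil_iff]
        intro pv hpv
        have ha := hdead pv hpv
        have hL := hLpos pv hpv
        unfold pvAliveB at ha
        unfold pvLive
        simp only [decide_eq_false_iff_not] at ha
        simp only [decide_eq_true_eq]
        omega
      have e2 : cells.items.filter
          (fun pv => decide (t + ((f + 1 : Nat) : Int) < pv.2.2 + 2 * pv.2.1)) = [] := by
        rw [List.filter_eq_nil_iff]
        intro pv hpv
        have ha := hdead pv hpv
        have hL := hLpos pv hpv
        unfold pvAliveB at ha
        simp only [decide_eq_false_iff_not] at ha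
        simp only [decide_eq_true_eq]
        omega
      rw [e1, e2]
    · set clQ := pvClQ lx ly (t + 1) cells (pvQueueOf t cells) PySem.Dict.empty with hclQdef
      obtain ⟨htick, hCI⟩ := pvTick_eq lx ly t cells hInv
      have hclnd := hCI.1
      have hfresh : ∀ e ∈ clQ.items, cells.contains e.1 = false := fun e he =>
        (PySem.Dict.get?_eq_none_iff_contains cells e.1).mp (hCI.2 e he).1
      have hmpos : ∀ e ∈ clQ.items, 1 ≤ e.2 := by
        intro e he
        obtain ⟨-, -, c, v, -, -, he2, hv1, -, -⟩ := hCI.2 e he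
        omega
      have hgrid : pvGrid lx ly (pvHyb cells t (pvQueueOf t cells) clQ)
          = pvGrid lx ly (pvF (pvCommitCells (t + 1) clQ cells) (t + 1)) := by
        rw [pvPostTick_grid t cells clQ hnd hLpos hfresh hclnd hmpos]
      have hqueue := pvQueue_next t cells clQ hnd hfresh hclnd
      have hstepA : pvLoopA lx ly (f + 1) (pvQueueOf t cells) (pvGrid lx ly (pvF cells t))
          = pvLoopA lx ly f (pvQueueOf (t + 1) (pvCommitCells (t + 1) clQ cells))
              (pvGrid lx ly (pvF (pvCommitCells (t + 1) clQ cells) (t + 1))) := by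
        rw [pvLoopA_succ, if_neg hqnil, htick]
        rw [show ((pvQueueOf t cells).filter (fun p => pvLive t (pvVal cells p)),
              pvGrid lx ly (pvHyb cells t (pvQueueOf t cells) clQ), clQ.keys).1
            ++ ((pvQueueOf t cells).filter (fun p => pvLive t (pvVal cells p)),
              pvGrid lx ly (pvHyb cells t (pvQueueOf t cells) clQ), clQ.keys).2.2
            = pvQueueOf (t + 1) (pvCommitCells (t + 1) clQ cells) from hqueue]
        rw [show (((pvQueueOf t cells).filter (fun p => pvLive t (pvVal cells p)),
              pvGrid lx ly (pvHyb cells t (pvQueueOf t cells) clQ), clQ.keys)).2.1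
            = pvGrid lx ly (pvF (pvCommitCells (t + 1) clQ cells) (t + 1)) from hgrid]
      by_cases hbr : h < t + 1
      · -- B breaks: nothing can still act, A's tick is a no-op and then its queue is empty
        have hclitems : clQ.items = [] := by
          rw [List.eq_nil_iff_forall_not_mem]
          intro e he
          obtain ⟨-, -, c, v, -, hvget, -, hv1, hstart, -⟩ := hCI.2 e he
          have hvmem := PySem.Dict.mem_items_of_get?_eq_some _ hvget
          have hb : v.2 + 2 * v.1 ≤ h := hHsp.1 (c, v) hvmem
          omega
        have hc'eq : pvCommitCells (t + 1) clQ cells = cells := by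
          unfold pvCommitCells
          rw [hclitems]
          rfl
        have hq' : pvQueueOf (t + 1) (pvCommitCells (t + 1) clQ cells) = [] := by
          rw [hc'eq, pvQueueOf_eq_nil_iff]
          intro pv hpv
          have hb := hHsp.1 pv hpv
          have hL := hLpos pv hpv
          unfold pvAliveB
          simp only [decide_eq_false_iff_not]
          omega
        rw [hstepA, hq', pvLoopA_nil, hc'eq,
          show pvLoopB lx ly (f + 1) (t + 1) h cells = cells from by
            rw [pvLoopB_succ, if_pos hbr],
          pvCountA_grid lx ly (t + 1) cells hnd (fun pv hpv => (hInv.2.2.1 pv hpv).1)]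
        have e1 : cells.items.filter (fun pv => pvLive (t + 1) pv.2) = [] := by
          rw [List.filter_eq_nil_iff]
          intro pv hpv
          have hb := hHsp.1 pv hpv
          have hL := hLpos pv hpv
          unfold pvLive
          simp only [decide_eq_true_eq]
          omega
        have e2 : cells.items.filter
            (fun pv => decide (t + ((f + 1 : Nat) : Int) < pv.2.2 + 2 * pv.2.1)) = [] := by
          rw [List.filter_eq_nil_iff]
          intro pv hpv
          have hb := hHsp.1 pv hpv
          have hL := hLpos pv hpv
          simp only [decide_eq_true_eq]
          omega
        rw [e1, e2]
      · -- both sides advance one tick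
        have hInv' := pvInv_next lx ly t cells hInv hCI
        have hHsp' := pvHsp_next t h cells clQ hfresh hclnd hHsp
        have hBstep : pvLoopB lx ly (f + 1) (t + 1) h cells
            = pvLoopB lx ly f (t + 1 + 1)
                ((clQ.items.map (fun e => (t + 1) + 2 * e.2)).foldl max h)
                (pvCommitCells (t + 1) clQ cells) := by
          rw [pvLoopB_succ, if_neg hbr, pvClaims_eq_clQ lx ly t cells hnd, ← hclQdef,
            pvCommit_split]
        rw [hstepA, hBstep]
        have hihr := ih (t + 1) ((clQ.items.map (fun e => (t + 1) + 2 * e.2)).foldl max h)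
          (pvCommitCells (t + 1) clQ cells) hInv' hHsp'
        rw [show ((t + 1) + (f : Int)) = t + ((f + 1 : Nat) : Int) from by push_cast; ring] at hihr
        exact hihr

-- ---- seeding ----

def pvStepA (matrix : List (List Int)) (i : Int)
    (st : List (List (List Int)) × List (Int × Int)) (j : Int) :
    List (List (List Int)) × List (Int × Int) :=
  let v := PySem.List.pyGetD (PySem.List.pyGetD matrix i []) j 0
  if v ≠ 0 then
    (pvSet2 st.1 (150 + i) (150 + j) [1, v, v], st.2 ++ [(150 + i, 150 + j)])
  else st

def pvStepB (matrix : List (List Int)) (i : Int)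
    (st : PySem.Dict (Int × Int) (Int × Int) × Int) (j : Int) :
    PySem.Dict (Int × Int) (Int × Int) × Int :=
  let v := PySem.List.pyGetD (PySem.List.pyGetD matrix i []) j 0
  if v ≠ 0 then (st.1.insert (150 + i, 150 + j) (v, 0), max st.2 (2 * v)) else st

-- the seeding invariant: processed positions are lexicographically below pos
def pvSInv (lx ly : Int) (pos : Int × Int) (cells : PySem.Dict (Int × Int) (Int × Int)) : Prop :=
  cells.keys.Nodup ∧
  ∀ pv ∈ cells.items, pvInB lx ly pv.1 ∧ pv.2.2 = 0 ∧ 1 ≤ pv.2.1 ∧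
    (pv.1.1 < pos.1 ∨ (pv.1.1 = pos.1 ∧ pv.1.2 < pos.2))

lemma pvSInv_mono (lx ly : Int) (pos pos' : Int × Int)
    (cells : PySem.Dict (Int × Int) (Int × Int))
    (h : pos.1 < pos'.1 ∨ (pos.1 = pos'.1 ∧ pos.2 ≤ pos'.2))
    (hs : pvSInv lx ly pos cells) : pvSInv lx ly pos' cells := by
  refine ⟨hs.1, fun pv hpv => ?_⟩
  obtain ⟨a, b, c, d⟩ := hs.2 pv hpv
  exact ⟨a, b, c, by omega⟩

lemma pvSeedRow (lx ly M : Int) (matrix : List (List Int)) (i : Int)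
    (hx0 : 0 ≤ 150 + i) (hx1 : 150 + i < lx) (hMly : M + 150 ≤ ly)
    (hread : ∀ j : Int, 0 ≤ j → j < M → 0 ≤ PySem.List.pyGetD (PySem.List.pyGetD matrix i []) j 0) :
    ∀ (fuel : Nat) (j : Int) (cells : PySem.Dict (Int × Int) (Int × Int)) (h : Int),
    0 ≤ j → (j + (fuel : Int) = M ∨ (fuel = 0 ∧ M ≤ j)) →
    pvSInv lx ly (150 + i, 150 + j) cells → pvHsp h cells →
    ((PySem.List.pyRange j M 1).foldl (pvStepA matrix i) (pvGrid lx ly (pvF cells 0), cells.keys)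
        = (pvGrid lx ly
            (pvF ((PySem.List.pyRange j M 1).foldl (pvStepB matrix i) (cells, h)).1 0),
            ((PySem.List.pyRange j M 1).foldl (pvStepB matrix i) (cells, h)).1.keys))
    ∧ pvSInv lx ly (150 + i + 1, 0)
        ((PySem.List.pyRange j M 1).foldl (pvStepB matrix i) (cells, h)).1
    ∧ pvHsp ((PySem.List.pyRange j M 1).foldl (pvStepB matrix i) (cells, h)).2
        ((PySem.List.pyRange j M 1).foldl (pvStepB matrix i) (cells, h)).1 := by
  intro fuel
  induction fuel with
  | zero =>
    intro j cells h hj0 hjM hSI hHsp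
    have hMj : M ≤ j := by
      rcases hjM with h1 | h1
      · omega
      · exact h1.2
    have hnil : PySem.List.pyRange j M 1 = [] := by
      rw [PySem.List.pyRange_one, show (M - j).toNat = 0 from by omega]
      rfl
    rw [hnil]
    exact ⟨rfl, pvSInv_mono lx ly _ _ _ (Or.inl (by omega)) hSI, hHsp⟩
  | succ fuel ih =>
    intro j cells h hj0 hjM hSI hHsp
    have hjM' : j < M := by
      rcases hjM with h1 | h1
      · omega
      · omega
    rw [PySem.List.pyRange_one_cons (by omega : j < M), List.foldl_cons, List.foldl_cons]
    by_cases hvz : PySem.List.pyGetD (PySem.List.pyGetD matrix i []) j 0 = 0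
    · have eA : pvStepA matrix i (pvGrid lx ly (pvF cells 0), cells.keys) j
          = (pvGrid lx ly (pvF cells 0), cells.keys) := by
        unfold pvStepA
        rw [if_neg (by simpa using hvz)]
      have eB : pvStepB matrix i (cells, h) j = (cells, h) := by
        unfold pvStepB
        rw [if_neg (by simpa using hvz)]
      rw [eA, eB]
      refine ih (j + 1) cells h (by omega) ?_
        (pvSInv_mono lx ly (150 + i, 150 + j) (150 + i, 150 + (j + 1)) cells
          (Or.inr ⟨rfl, by omega⟩) hSI) hHsp
      left
      have h1 : j + ((fuel + 1 : Nat) : Int) = M := by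
        rcases hjM with h1 | h1
        · exact h1
        · omega
      push_cast at h1 ⊢
      omega
    · have hv1 : 1 ≤ PySem.List.pyGetD (PySem.List.pyGetD matrix i []) j 0 := by
        have := hread j hj0 hjM'
        omega
      set v := PySem.List.pyGetD (PySem.List.pyGetD matrix i []) j 0 with hvdef
      have hfr : cells.get? (150 + i, 150 + j) = none := by
        rcases hg : cells.get? (150 + i, 150 + j) with _ | w
        · rfl
        · obtain ⟨-, -, -, hlex⟩ := hSI.2 _ (PySem.Dict.mem_items_of_get?_eq_some _ hg)
          simp only at hlex
          omega
      have hcont : cells.contains (150 + i, 150 + j) = false :=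
        (PySem.Dict.get?_eq_none_iff_contains cells _).mp hfr
      have hkmem : (150 + i, 150 + j) ∉ cells.keys :=
        (PySem.Dict.get?_eq_none_iff_not_mem_keys cells _).mp hfr
      have hkinB : pvInB lx ly (150 + i, 150 + j) :=
        ⟨hx0, hx1, show (0 : Int) ≤ 150 + j by omega, show (150 : Int) + j < ly by omega⟩
      have eA : pvStepA matrix i (pvGrid lx ly (pvF cells 0), cells.keys) j
          = (pvGrid lx ly (pvF (cells.insert (150 + i, 150 + j) (v, 0)) 0),
              (cells.insert (150 + i, 150 + j) (v, 0)).keys) := by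
        unfold pvStepA
        rw [if_pos (by simpa using hvz)]
        have hg : pvSet2 (pvGrid lx ly (pvF cells 0)) (150 + i) (150 + j) [1, v, v]
            = pvGrid lx ly (pvF (cells.insert (150 + i, 150 + j) (v, 0)) 0) := by
          rw [show pvSet2 (pvGrid lx ly (pvF cells 0)) (150 + i) (150 + j) [1, v, v]
              = pvSet2 (pvGrid lx ly (pvF cells 0)) ((150 + i, 150 + j) : Int × Int).1
                  ((150 + i, 150 + j) : Int × Int).2 [1, v, v] from rfl,
            pvGrid_set2 lx ly _ _ _ hkinB]
          apply pvGrid_congr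
          intro r _
          unfold pvUpd pvF
          by_cases hr : r = (150 + i, 150 + j)
          · subst hr
            rw [if_pos rfl, PySem.Dict.get?_insert_self]
            have hrend : pvRender 0 (v, 0) = [1, v, v] := by
              unfold pvRender
              rw [if_pos (by simp; omega)]
              norm_num
            exact hrend.symm
          · rw [if_neg hr, PySem.Dict.get?_insert_of_ne cells (v, 0) hr]
        rw [hg, PySem.Dict.keys_insert_of_not_contains cells (v, 0) hcont]
      have eB : pvStepB matrix i (cells, h) j
          = (cells.insert (150 + i, 150 + j) (v, 0), max h (2 * v)) := by
        unfold pvStepB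
        rw [if_pos (by simpa using hvz)]
      have hSI' : pvSInv lx ly (150 + i, 150 + (j + 1))
          (cells.insert (150 + i, 150 + j) (v, 0)) := by
        constructor
        · rw [PySem.Dict.keys_insert_of_not_contains cells (v, 0) hcont, List.nodup_append]
          exact ⟨hSI.1, List.nodup_singleton _,
            by intro a ha b hb he; subst he; exact hkmem (List.mem_singleton.mp hb ▸ ha)⟩
        · intro pv hpv
          rw [PySem.Dict.items_insert_of_not_contains cells (v, 0) hcont, List.mem_append] at hpv
          rcases hpv with hp | hp
          · obtain ⟨a, b, c, d⟩ := hSI.2 pv hp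
            exact ⟨a, b, c, by omega⟩
          · simp only [List.mem_singleton] at hp
            subst hp
            exact ⟨hkinB, rfl, hv1,
              Or.inr ⟨rfl, show (150 : Int) + j < 150 + (j + 1) by omega⟩⟩
      have hHsp' : pvHsp (max h (2 * v)) (cells.insert (150 + i, 150 + j) (v, 0)) := by
        constructor
        · intro pv hpv
          rw [PySem.Dict.items_insert_of_not_contains cells (v, 0) hcont, List.mem_append] at hpv
          rcases hpv with hp | hp
          · exact le_trans (hHsp.1 pv hp) (le_max_left _ _)
          · simp only [List.mem_singleton] at hp
            subst hp
            show (0 : Int) + 2 * v ≤ max h (2 * v)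
            have := le_max_right h (2 * v)
            omega
        · rcases max_choice h (2 * v) with hc | hc
          · rcases hHsp.2 with h0 | ⟨pv, hpv, hd⟩
            · exact Or.inl (by omega)
            · refine Or.inr ⟨pv, ?_, by omega⟩
              rw [PySem.Dict.items_insert_of_not_contains cells (v, 0) hcont]
              exact List.mem_append_left _ hpv
          · refine Or.inr ⟨((150 + i, 150 + j), (v, 0)), ?_,
              show (0 : Int) + 2 * v = max h (2 * v) by rw [hc]; ring⟩
            rw [PySem.Dict.items_insert_of_not_contains cells (v, 0) hcont]
            exact List.mem_append_right _ (by simp)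
      rw [eA, eB]
      refine ih (j + 1) (cells.insert (150 + i, 150 + j) (v, 0)) (max h (2 * v)) (by omega) ?_
        hSI' hHsp'
      left
      have h1 : j + ((fuel + 1 : Nat) : Int) = M := by
        rcases hjM with h1 | h1
        · exact h1
        · omega
      push_cast at h1 ⊢
      omega

lemma pvSeedAll (lx ly N M : Int) (matrix : List (List Int))
    (hNlx : N + 150 ≤ lx) (hMly : M + 150 ≤ ly)
    (hread : ∀ i j : Int, 0 ≤ i → i < N → 0 ≤ j → j < M →
      0 ≤ PySem.List.pyGetD (PySem.List.pyGetD matrix i []) j 0) :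
    ∀ (fuel : Nat) (i : Int) (cells : PySem.Dict (Int × Int) (Int × Int)) (h : Int),
    0 ≤ i → (i + (fuel : Int) = N ∨ (fuel = 0 ∧ N ≤ i)) →
    pvSInv lx ly (150 + i, 0) cells → pvHsp h cells →
    ((PySem.List.pyRange i N 1).foldl
        (fun st i => (PySem.List.pyRange 0 M 1).foldl (pvStepA matrix i) st)
        (pvGrid lx ly (pvF cells 0), cells.keys)
      = (pvGrid lx ly
          (pvF ((PySem.List.pyRange i N 1).foldl
            (fun st i => (PySem.List.pyRange 0 M 1).foldl (pvStepB matrix i) st) (cells, h)).1 0),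
          ((PySem.List.pyRange i N 1).foldl
            (fun st i => (PySem.List.pyRange 0 M 1).foldl (pvStepB matrix i) st) (cells, h)).1.keys))
    ∧ (∃ pos, pvSInv lx ly pos
        ((PySem.List.pyRange i N 1).foldl
          (fun st i => (PySem.List.pyRange 0 M 1).foldl (pvStepB matrix i) st) (cells, h)).1)
    ∧ pvHsp ((PySem.List.pyRange i N 1).foldl
          (fun st i => (PySem.List.pyRange 0 M 1).foldl (pvStepB matrix i) st) (cells, h)).2
        ((PySem.List.pyRange i N 1).foldl
          (fun st i => (PySem.List.pyRange 0 M 1).foldl (pvStepB matrix i) st) (cells, h)).1 := by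
  intro fuel
  induction fuel with
  | zero =>
    intro i cells h hi0 hiN hSI hHsp
    have hNi : N ≤ i := by
      rcases hiN with h1 | h1
      · omega
      · exact h1.2
    have hnil : PySem.List.pyRange i N 1 = [] := by
      rw [PySem.List.pyRange_one, show (N - i).toNat = 0 from by omega]
      rfl
    rw [hnil]
    exact ⟨rfl, ⟨_, hSI⟩, hHsp⟩
  | succ fuel ih =>
    intro i cells h hi0 hiN hSI hHsp
    have hiN' : i < N := by
      rcases hiN with h1 | h1
      · omega
      · omega
    rw [PySem.List.pyRange_one_cons (by omega : i < N), List.foldl_cons, List.foldl_cons]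
    obtain ⟨hrow, hSI', hHsp'⟩ := pvSeedRow lx ly M matrix i (by omega) (by omega) hMly
      (fun j hj0 hjM => hread i j hi0 hiN' hj0 hjM) M.toNat 0 cells h (le_refl 0)
      (by by_cases hM : 0 ≤ M
          · left; omega
          · right; omega)
      (pvSInv_mono lx ly (150 + i, 0) (150 + i, 150 + 0) cells
        (Or.inr ⟨rfl, by omega⟩) hSI) hHsp
    rw [hrow]
    refine ih (i + 1) _ _ (by omega) ?_
      (pvSInv_mono lx ly (150 + i + 1, 0) (150 + (i + 1), 0) _
        (Or.inr ⟨by omega, by omega⟩) hSI') hHsp'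
    left
    have h1 : i + ((fuel + 1 : Nat) : Int) = N := by
      rcases hiN with h1 | h1
      · exact h1
      · omega
    push_cast at h1 ⊢
    omega

-- ---- putting the pieces together ----

lemma pvGrid0 (lx ly : Int) :
    (PySem.List.pyRange 0 lx 1).map (fun _ =>
      (PySem.List.pyRange 0 ly 1).map (fun _ => ([0, 0, 0] : List Int)))
      = pvGrid lx ly (pvF (PySem.Dict.empty : PySem.Dict (Int × Int) (Int × Int)) 0) := by
  unfold pvGrid
  apply List.map_congr_left
  intro x _
  apply List.map_congr_left
  intro y _
  unfold pvF
  rw [PySem.Dict.get?_empty]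

lemma pvQueueOf0 (cells : PySem.Dict (Int × Int) (Int × Int))
    (hb : ∀ pv ∈ cells.items, pv.2.2 = 0 ∧ 1 ≤ pv.2.1) :
    pvQueueOf 0 cells = cells.keys := by
  unfold pvQueueOf
  have hself : cells.items.filter (fun pv => pvAliveB 0 pv.2) = cells.items := by
    apply List.filter_eq_self.mpr
    intro pv hpv
    have := hb pv hpv
    unfold pvAliveB
    simp only [decide_eq_true_eq]
    omega
  rw [hself]
  rfl

lemma pvInv0 (lx ly : Int) (pos : Int × Int) (cells : PySem.Dict (Int × Int) (Int × Int))
    (hSI : pvSInv lx ly pos cells) : pvInv lx ly 0 cells := by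
  obtain ⟨hnd, hmem⟩ := hSI
  refine ⟨le_refl 0, hnd, ?_, ?_, ?_⟩
  · intro pv hpv
    obtain ⟨a, b, c, -⟩ := hmem pv hpv
    exact ⟨a, by omega, by omega, c⟩
  · apply pvPairwise_const _ 0
    intro x hx
    obtain ⟨pv, hpv, rfl⟩ := List.mem_map.mp hx
    exact (hmem pv hpv).2.1
  · intro p hp hnone q hq v hv hv1
    have hb0 : v.2 = 0 := (hmem (q, v) (PySem.Dict.mem_items_of_get?_eq_some _ hv)).2.1
    omega

lemma solution_eq (N M K : Int) (matrix : List (List Int)) :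
    solution N M K matrix
      = (pvLoopA (N + 150 * 2) (M + 150 * 2) K.toNat
          ((PySem.List.pyRange 0 N 1).foldl
            (fun st i => (PySem.List.pyRange 0 M 1).foldl (pvStepA matrix i) st)
            ((PySem.List.pyRange 0 (N + 150 * 2) 1).map (fun _ =>
              (PySem.List.pyRange 0 (M + 150 * 2) 1).map (fun _ => ([0, 0, 0] : List Int))),
              ([] : List (Int × Int)))).2
          ((PySem.List.pyRange 0 N 1).foldl
            (fun st i => (PySem.List.pyRange 0 M 1).foldl (pvStepA matrix i) st)
            ((PySem.List.pyRange 0 (N + 150 * 2) 1).map (fun _ =>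
              (PySem.List.pyRange 0 (M + 150 * 2) 1).map (fun _ => ([0, 0, 0] : List Int))),
              ([] : List (Int × Int)))).1).foldl
          (fun acc row => row.foldl (fun acc cell => if 1 ≤ cell.getD 0 0 then acc + 1 else acc) acc) 0 := rfl

lemma solution_alt_eq (N M K : Int) (matrix : List (List Int)) :
    solution_alt N M K matrix
      = (pvLoopB (N + 300) (M + 300) K.toNat 1
          ((PySem.List.pyRange 0 N 1).foldl
            (fun st i => (PySem.List.pyRange 0 M 1).foldl (pvStepB matrix i) st)
            ((PySem.Dict.empty : PySem.Dict (Int × Int) (Int × Int)), (0 : Int))).2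
          ((PySem.List.pyRange 0 N 1).foldl
            (fun st i => (PySem.List.pyRange 0 M 1).foldl (pvStepB matrix i) st)
            ((PySem.Dict.empty : PySem.Dict (Int × Int) (Int × Int)), (0 : Int))).1).values.foldl
          (fun acc v => acc + (if K < v.2 + 2 * v.1 then 1 else 0)) 0 := rfl

-- ===== VERDICT (by name: the statement is the Claim_ definition above) =====
theorem solution_spec : Claim_equal_solution := by
  intro N M K matrix hdom hpre
  unfold Spec_solution
  rw [solution_eq, solution_alt_eq,
    show (N + 150 * 2 : Int) = N + 300 from by ring,
    show (M + 150 * 2 : Int) = M + 300 from by ring]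
  have hread : ∀ i j : Int, 0 ≤ i → i < N → 0 ≤ j → j < M →
      0 ≤ PySem.List.pyGetD (PySem.List.pyGetD matrix i []) j 0 := by
    intro i j hi0 hiN hj0 hjM
    rcases hpre with hN | hM | ⟨hlen, hrows⟩
    · omega
    · omega
    · have hil : i.toNat < matrix.length := by omega
      have hrowmem : matrix[i.toNat] ∈ matrix.take N.toNat := by
        have he : (matrix.take N.toNat)[i.toNat]'(by simp; omega) = matrix[i.toNat] :=
          List.getElem_take
        exact he ▸ List.getElem_mem _
      obtain ⟨hMr, hentries⟩ := hrows _ hrowmem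
      have hjl : j.toNat < (matrix[i.toNat]).length := by omega
      have hentrymem : (matrix[i.toNat])[j.toNat] ∈ (matrix[i.toNat]).take M.toNat := by
        have he : ((matrix[i.toNat]).take M.toNat)[j.toNat]'(by simp; omega)
            = (matrix[i.toNat])[j.toNat] := List.getElem_take
        exact he ▸ List.getElem_mem _
      have hx := hentries _ hentrymem
      rw [PySem.List.pyGetD_of_nonneg matrix [] hi0,
        List.getD_eq_getElem matrix [] hil,
        PySem.List.pyGetD_of_nonneg _ 0 hj0,
        List.getD_eq_getElem _ 0 hjl]
      exact hx
  rw [pvGrid0 (N + 300) (M + 300),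
    show ([] : List (Int × Int))
      = (PySem.Dict.empty : PySem.Dict (Int × Int) (Int × Int)).keys from rfl]
  obtain ⟨hseed, ⟨pos, hSI⟩, hHsp0⟩ := pvSeedAll (N + 300) (M + 300) N M matrix (by omega)
    (by omega) hread N.toNat 0 PySem.Dict.empty 0 (le_refl 0)
    (by by_cases hN : 0 ≤ N
        · left; omega
        · right; omega)
    ⟨List.nodup_nil, by intro e he; exact absurd he (List.not_mem_nil)⟩
    ⟨by intro e he; exact absurd he (List.not_mem_nil), Or.inl rfl⟩
  rw [hseed]
  set cells0 := ((PySem.List.pyRange 0 N 1).foldl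
    (fun st i => (PySem.List.pyRange 0 M 1).foldl (pvStepB matrix i) st)
    ((PySem.Dict.empty : PySem.Dict (Int × Int) (Int × Int)), (0 : Int))).1 with hc0
  set h0 := ((PySem.List.pyRange 0 N 1).foldl
    (fun st i => (PySem.List.pyRange 0 M 1).foldl (pvStepB matrix i) st)
    ((PySem.Dict.empty : PySem.Dict (Int × Int) (Int × Int)), (0 : Int))).2 with hh0
  have hb0 : ∀ pv ∈ cells0.items, pv.2.2 = 0 ∧ 1 ≤ pv.2.1 := fun pv hpv =>
    ⟨(hSI.2 pv hpv).2.1, (hSI.2 pv hpv).2.2.1⟩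
  have hInv0 := pvInv0 (N + 300) (M + 300) pos cells0 hSI
  rw [← pvQueueOf0 cells0 hb0, pvCountB K]
  by_cases hK : 0 ≤ K
  · have hs := pvSim (N + 300) (M + 300) K.toNat 0 h0 cells0 hInv0 hHsp0
    rw [show ((0 : Int) + 1) = 1 from by ring,
      show ((0 : Int) + (K.toNat : Int)) = K from by omega] at hs
    exact hs
  · rw [show K.toNat = 0 from by omega]
    rw [show pvLoopA (N + 300) (M + 300) 0 (pvQueueOf 0 cells0)
          (pvGrid (N + 300) (M + 300) (pvF cells0 0))
        = pvGrid (N + 300) (M + 300) (pvF cells0 0) from rfl,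
      show pvLoopB (N + 300) (M + 300) 0 1 h0 cells0 = cells0 from rfl,
      pvCountA_grid (N + 300) (M + 300) 0 cells0 hInv0.2.1
        (fun pv hpv => (hInv0.2.2.1 pv hpv).1)]
    congr 2
    apply List.filter_congr
    intro pv hpv
    have := hb0 pv hpv
    rw [Bool.eq_iff_iff]
    simp only [pvLive, decide_eq_true_eq]
    omega
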